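-- pv_equiv track=rewrite | github.com/osbornch/fev | museum.py | find_distance_to_guards
-- ===== SOURCE A (Python) =====
-- from collections import deque
-- from collections import deque
--
-- def find_distance_to_guards(grid):
--     if not grid: return []
--
--     M, N = len(grid), len(grid[0])
--     # Use -1 as the default for everything (Walls and Unreachable)
--     # We'll use a separate 'visited' logic or a specific placeholder for 'Open'
--     res = [[-1 for _ in range(N)] for _ in range(M)]
--     queue = deque()
--
--     for r in range(M):
--         for c in range(N):
--             if grid[r][c] == 'G':
--                 res[r][c] = 0
--                 queue.append((r, c))
--             elif grid[r][c] == 'O':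
--                 # Mark open rooms with a special value to denote "needs visiting"
--                 res[r][c] = float('inf')
--
--     directions = [(0, 1), (0, -1), (1, 0), (-1, 0)]
--
--     while queue:
--         r, c = queue.popleft()
--
--         for dr, dc in directions:
--             nr, nc = r + dr, c + dc
--
--             # Only step into rooms marked as 'Open' (inf)
--             if 0 <= nr < M and 0 <= nc < N and res[nr][nc] == float('inf'):
--                 res[nr][nc] = res[r][c] + 1
--                 queue.append((nr, nc))
--
--     # Final pass: Convert any remaining 'inf' (unreachable) to -1
--     for r in range(M):
--         for c in range(N):
--             if res[r][c] == float('inf'):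
--                 res[r][c] = -1
--
--     return res
-- ===== SOURCE B (Python) =====
-- def find_distance_to_guards(grid):
--     if not grid:
--         return []
--     M, N = len(grid), len(grid[0])
--     INF = M * N  # any true distance is at most M*N - 1
--
--     def val(cur, r, c):
--         # one Bellman-Ford relaxation of a single cell
--         if cur[r][c] != INF:
--             return cur[r][c]
--         best = INF
--         for nr, nc in ((r - 1, c), (r + 1, c), (r, c - 1), (r, c + 1)):
--             if 0 <= nr < M and 0 <= nc < N and 0 <= cur[nr][nc] < best:
--                 best = cur[nr][nc]
--         return best + 1 if best < INF else INF
--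
--     d = [[0 if grid[r][c] == 'G' else (INF if grid[r][c] == 'O' else -1)
--           for c in range(N)]
--          for r in range(M)]
--     for _ in range(M * N):
--         nd = [[val(d, r, c) for c in range(N)] for r in range(M)]
--         if nd == d:
--             break
--         d = nd
--     return [[-1 if x == INF else x for x in row] for row in d]
-- ===== Notes on version B (the rewrite author's own statement) =====
-- stated objective: alternative
-- what changed: A runs a multi-source BFS with a deque and a float('inf') in-res sentinel; B does no graph traversal at all: it iterates a whole-grid Bellman-Ford relaxation step (each open cell takes 1 + min of its finite neighbours) until the distance matrix reaches a fixed point, then converts the INF sentinel to -1.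
import Mathlib
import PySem

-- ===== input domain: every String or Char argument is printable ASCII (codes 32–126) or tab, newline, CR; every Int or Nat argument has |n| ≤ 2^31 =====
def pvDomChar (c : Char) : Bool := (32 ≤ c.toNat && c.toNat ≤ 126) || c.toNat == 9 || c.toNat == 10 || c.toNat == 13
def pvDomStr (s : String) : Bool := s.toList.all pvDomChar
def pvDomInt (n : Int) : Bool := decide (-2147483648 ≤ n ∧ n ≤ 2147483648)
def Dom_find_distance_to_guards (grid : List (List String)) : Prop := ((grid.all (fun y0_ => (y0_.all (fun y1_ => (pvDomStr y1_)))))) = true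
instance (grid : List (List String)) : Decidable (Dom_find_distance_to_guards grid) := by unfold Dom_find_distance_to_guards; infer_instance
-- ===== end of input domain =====

-- B replaces A's deque BFS (with a float('inf') sentinel stored in res and distances read
-- from the dequeued parent) by queue-free Bellman-Ford fixed-point iteration: a whole-grid
-- relaxation step (each open cell takes 1 + min of its finite neighbours) repeated until the
-- distance matrix stops changing; objective: alternative (same results, no traversal at all).

-- shared small accessors (2-d list read/write, Python's grid[r][c] / assignment)
def get2 {α : Type} (l : List (List α)) (d : α) (r c : Nat) : α := (l.getD r []).getD c d
def set2 {α : Type} (l : List (List α)) (r c : Nat) (v : α) : List (List α) :=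
  l.set r ((l.getD r []).set c v)
def pvCell (grid : List (List String)) (r c : Nat) : String := get2 grid "" r c
-- row-major scan collecting the 'G' cells (A builds its initial deque this way)
def pvGuards (grid : List (List String)) (M N : Nat) : List (Nat × Nat) :=
  (List.range M).flatMap (fun r =>
    (List.range N).filterMap (fun c => if pvCell grid r c = "G" then some (r, c) else none))

-- ===== PORT A =====
-- A's res cells: some v = an int distance (or -1 for walls), none = float('inf') ("open, unseen")
def cA (l : List (List (Option Int))) (r c : Nat) : Option Int := get2 l (some (-1)) r c
def pvInitA (grid : List (List String)) (M N : Nat) : List (List (Option Int)) :=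
  (List.range M).map (fun r => (List.range N).map (fun c =>
    if pvCell grid r c = "G" then some 0
    else if pvCell grid r c = "O" then none
    else some (-1)))
def pvDirs : List (Int × Int) := [(0, 1), (0, -1), (1, 0), (-1, 0)]
-- one direction of A's inner for-loop: discover the neighbour if it is inf, writing res[r][c]+1
-- (inf+1 = inf in Python: Option.map keeps none as none — unreachable in real runs)
def pvAStep (M N : Nat) (st : List (List (Option Int)) × List (Nat × Nat))
    (rc : Nat × Nat) (dd : Int × Int) : List (List (Option Int)) × List (Nat × Nat) :=
  let nr : Int := rc.1 + dd.1
  let nc : Int := rc.2 + dd.2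
  if 0 ≤ nr ∧ nr < (M : Int) ∧ 0 ≤ nc ∧ nc < (N : Int) ∧ cA st.1 nr.toNat nc.toNat = none then
    (set2 st.1 nr.toNat nc.toNat ((cA st.1 rc.1 rc.2).map (· + 1)),
     st.2 ++ [(nr.toNat, nc.toNat)])
  else st
-- A's while-loop over the deque; fuel only makes the recursion total (Python's loop diverges
-- exactly where the fuel could run out, which is unreachable from A's initial states)
def pvALoop (M N : Nat) : Nat → List (List (Option Int)) → List (Nat × Nat) → List (List (Option Int))
  | 0, res, _ => res
  | _ + 1, res, [] => res
  | fuel + 1, res, rc :: rest =>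
    let st := pvDirs.foldl (fun s dd => pvAStep M N s rc dd) (res, [])
    pvALoop M N fuel st.1 (rest ++ st.2)
-- A's final pass: any remaining inf becomes -1 (ints are unchanged)
def toOut (l : List (List (Option Int))) : List (List Int) :=
  l.map (fun row => row.map (fun x => x.getD (-1)))
def find_distance_to_guards (grid : List (List String)) : List (List Int) :=
  if grid = [] then []
  else
    let M := grid.length
    let N := (grid.headD []).length
    let q := pvGuards grid M N
    toOut (pvALoop M N (q.length + 2 * (M * N) + 1) (pvInitA grid M N) q)

-- ===== PORT B =====
def cB (l : List (List Int)) (r c : Nat) : Int := get2 l (-1) r c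
-- Source B's INF sentinel: M*N (any true distance is at most M*N - 1)
def pvINF (M N : Nat) : Int := (M * N : Nat)
-- the four neighbour coordinates of Source B's val, in its order
def pvNbrs4 (r c : Nat) : List (Int × Int) :=
  [((r : Int) - 1, (c : Int)), ((r : Int) + 1, (c : Int)),
   ((r : Int), (c : Int) - 1), ((r : Int), (c : Int) + 1)]
-- Source B's best: minimum finite (≥ 0, < running best) in-bounds neighbour value
def pvBest (M N : Nat) (cur : List (List Int)) (r c : Nat) : Int :=
  (pvNbrs4 r c).foldl
    (fun best nb =>
      if 0 ≤ nb.1 ∧ nb.1 < (M : Int) ∧ 0 ≤ nb.2 ∧ nb.2 < (N : Int) ∧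
         0 ≤ cB cur nb.1.toNat nb.2.toNat ∧ cB cur nb.1.toNat nb.2.toNat < best
       then cB cur nb.1.toNat nb.2.toNat else best)
    (pvINF M N)
-- Source B's val: one Bellman-Ford relaxation of a single cell
def pvVal (M N : Nat) (cur : List (List Int)) (r c : Nat) : Int :=
  if cB cur r c ≠ pvINF M N then cB cur r c
  else if pvBest M N cur r c < pvINF M N then pvBest M N cur r c + 1 else pvINF M N
def pvRelax (M N : Nat) (cur : List (List Int)) : List (List Int) :=
  (List.range M).map (fun r => (List.range N).map (fun c => pvVal M N cur r c))
-- Source B's for-loop over range(M*N) with the early break on a fixed point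
def pvRLoop (M N : Nat) : Nat → List (List Int) → List (List Int)
  | 0, d => d
  | fuel + 1, d =>
    let nd := pvRelax M N d
    if nd = d then d else pvRLoop M N fuel nd
def pvInitR (grid : List (List String)) (M N : Nat) : List (List Int) :=
  (List.range M).map (fun r => (List.range N).map (fun c =>
    if pvCell grid r c = "G" then 0
    else if pvCell grid r c = "O" then pvINF M N else -1))
def find_distance_to_guards_alt (grid : List (List String)) : List (List Int) :=
  if grid = [] then []
  else
    let M := grid.length
    let N := (grid.headD []).length
    (pvRLoop M N (M * N) (pvInitR grid M N)).map
      (fun row => row.map (fun x => if x = pvINF M N then -1 else x))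

-- ===== PRECONDITION & SPEC =====
-- Pre_ excludes only grids with a row shorter than the first row: there A raises IndexError
-- (grid[r][c] with c < len(grid[0])); rows longer than the first are fine (extra cells ignored).
def Pre_find_distance_to_guards (grid : List (List String)) : Prop :=
  ∀ row ∈ grid, (grid.headD []).length ≤ row.length
instance (grid : List (List String)) : Decidable (Pre_find_distance_to_guards grid) := by
  unfold Pre_find_distance_to_guards; infer_instance
def pvWitness_find_distance_to_guards : List (List String) := [["G", "O"], ["O", "O"]]
def Spec_find_distance_to_guards (grid : List (List String)) (out : List (List Int)) : Prop := out = find_distance_to_guards_alt grid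
instance (grid : List (List String)) (out : List (List Int)) : Decidable (Spec_find_distance_to_guards grid out) := by unfold Spec_find_distance_to_guards; infer_instance

-- ===== CLAIM (what is proved, stated in full; the proofs are below) =====
def Claim_equal_find_distance_to_guards : Prop := ∀ (grid : List (List String)), Dom_find_distance_to_guards grid → Pre_find_distance_to_guards grid → Spec_find_distance_to_guards grid (find_distance_to_guards grid)

-- ===== LEMMAS AND PROOFS =====

-- proof-side intermediate program: the same BFS expansion organised level by level
-- (used only as a bridge between A's deque BFS and B's relaxation fixpoint)
def pvInitB (grid : List (List String)) (M N : Nat) : List (List Int) :=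
  (List.range M).map (fun r => (List.range N).map (fun c =>
    if pvCell grid r c = "G" then (0 : Int) else -1))
def pvSeen0 (grid : List (List String)) (M N : Nat) : List (List Bool) :=
  (List.range M).map (fun r => (List.range N).map (fun c => decide (pvCell grid r c = "G")))
def pvNbrs (rc : Nat × Nat) : List (Int × Int) :=
  [((rc.1 : Int), (rc.2 : Int) + 1), ((rc.1 : Int), (rc.2 : Int) - 1),
   ((rc.1 : Int) + 1, (rc.2 : Int)), ((rc.1 : Int) - 1, (rc.2 : Int))]
def pvBStep (grid : List (List String)) (M N : Nat) (dist : Int)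
    (st : List (List Int) × List (List Bool) × List (Nat × Nat)) (nb : Int × Int) :
    List (List Int) × List (List Bool) × List (Nat × Nat) :=
  if 0 ≤ nb.1 ∧ nb.1 < (M : Int) ∧ 0 ≤ nb.2 ∧ nb.2 < (N : Int) ∧
     get2 st.2.1 false nb.1.toNat nb.2.toNat = false ∧ pvCell grid nb.1.toNat nb.2.toNat = "O" then
    (set2 st.1 nb.1.toNat nb.2.toNat dist, set2 st.2.1 nb.1.toNat nb.2.toNat true,
     st.2.2 ++ [(nb.1.toNat, nb.2.toNat)])
  else st
def pvBCell (grid : List (List String)) (M N : Nat) (dist : Int)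
    (st : List (List Int) × List (List Bool) × List (Nat × Nat)) (rc : Nat × Nat) :
    List (List Int) × List (List Bool) × List (Nat × Nat) :=
  (pvNbrs rc).foldl (pvBStep grid M N dist) st
def pvBLoop (grid : List (List String)) (M N : Nat) :
    Nat → List (List Int) → List (List Bool) → List (Nat × Nat) → Int → List (List Int)
  | 0, res, _, _, _ => res
  | _ + 1, res, _, [], _ => res
  | fuel + 1, res, seen, f, dist =>
    let st := f.foldl (pvBCell grid M N (dist + 1)) (res, seen, ([] : List (Nat × Nat)))
    pvBLoop grid M N fuel st.1 st.2.1 st.2.2 (dist + 1)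

-- rectangular M×N shape
def Good {α : Type} (M N : Nat) (l : List (List α)) : Prop :=
  l.length = M ∧ ∀ (i : Nat) (h : i < l.length), (l[i]'h).length = N

def cS (l : List (List Bool)) (r c : Nat) : Bool := get2 l false r c
-- number of inf cells in A's res
def infC (l : List (List (Option Int))) : Nat :=
  (l.map (fun row => row.countP (fun x => x.isNone))).sum

-- the coupling invariant between A's state and the level-BFS state
def StInv (grid : List (List String)) (M N : Nat) (ra : List (List (Option Int)))
    (rb : List (List Int)) (sn : List (List Bool)) : Prop :=
  Good M N ra ∧ Good M N rb ∧ Good M N sn ∧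
  ∀ r c : Nat, r < M → c < N →
    (cA ra r c = none → pvCell grid r c = "O" ∧ cS sn r c = false ∧ cB rb r c = -1) ∧
    (∀ v : Int, cA ra r c = some v →
      (cS sn r c = true → cB rb r c = v) ∧
      (cS sn r c = false → v = -1 ∧ cB rb r c = -1 ∧ pvCell grid r c ≠ "O"))

lemma get2_eq_getElem {α : Type} (l : List (List α)) (d : α) (r c : Nat)
    (h1 : r < l.length) (h2 : c < (l[r]'h1).length) : get2 l d r c = (l[r]'h1)[c]'h2 := by
  simp [get2, List.getD_eq_getElem?_getD, List.getElem?_eq_getElem h1,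
    List.getElem?_eq_getElem h2]

lemma good_get2 {α : Type} {M N : Nat} {l : List (List α)} (hg : Good M N l)
    (d : α) {r c : Nat} (hr : r < M) (hc : c < N) :
    get2 l d r c = (l[r]'(by rw [hg.1]; exact hr))[c]'(by rw [hg.2 r _]; exact hc) :=
  get2_eq_getElem l d r c _ _

lemma good_set2 {α : Type} {M N : Nat} {l : List (List α)} (hg : Good M N l)
    (r c : Nat) (v : α) : Good M N (set2 l r c v) := by
  obtain ⟨h1, h2⟩ := hg
  refine ⟨by simp [set2, h1], ?_⟩
  intro i hi
  simp only [set2, List.length_set] at hi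
  simp only [set2]
  rw [List.getElem_set]
  split
  · next heq =>
    subst heq
    rw [List.length_set, List.getD_eq_getElem l [] hi]
    exact h2 r hi
  · exact h2 i hi

lemma get2_set2_self {α : Type} {M N : Nat} {l : List (List α)} (hg : Good M N l)
    {r c : Nat} (hr : r < M) (hc : c < N) (v d : α) : get2 (set2 l r c v) d r c = v := by
  have hrl : r < l.length := hg.1 ▸ hr
  have hcl : c < (l[r]'hrl).length := (hg.2 r hrl) ▸ hc
  simp only [get2, set2, List.getD_eq_getElem?_getD]
  rw [List.getElem?_set_self (by simpa using hrl)]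
  simp only [Option.getD_some]
  simp only [List.getElem?_eq_getElem hrl, Option.getD_some]
  rw [List.getElem?_set_self (by simpa using hcl)]
  simp

lemma get2_set2_ne {α : Type} (l : List (List α)) (r c r' c' : Nat) (v d : α)
    (h : r ≠ r' ∨ c ≠ c') : get2 (set2 l r c v) d r' c' = get2 l d r' c' := by
  rcases h with h | h
  · simp only [get2, set2, List.getD_eq_getElem?_getD, List.getElem?_set_ne h]
  · by_cases hr : r < l.length
    · by_cases hrr : r = r'
      · subst hrr
        simp only [get2, set2, List.getD_eq_getElem?_getD]
        rw [List.getElem?_set_self (by simpa using hr)]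
        simp only [Option.getD_some]
        rw [List.getElem?_set_ne h]
      · simp only [get2, set2, List.getD_eq_getElem?_getD, List.getElem?_set_ne hrr]
    · rw [set2, List.set_eq_of_length_le (Nat.le_of_not_lt hr)]

lemma countP_set {α : Type} (p : α → Bool) :
    ∀ (l : List α) (i : Nat) (v old : α), l[i]? = some old →
      (l.set i v).countP p + (if p old then 1 else 0) =
        l.countP p + (if p v then 1 else 0) := by
  intro l
  induction l with
  | nil => intro i v old h; simp at h
  | cons a t ih =>
    intro i v old h
    cases i with
    | zero =>
      simp only [List.getElem?_cons_zero, Option.some.injEq] at h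
      subst h
      show (v :: t).countP p + _ = _
      simp only [List.countP_cons]
      omega
    | succ j =>
      simp only [List.getElem?_cons_succ] at h
      have hset : (a :: t).set (j + 1) v = a :: t.set j v := by simp
      rw [hset]
      simp only [List.countP_cons]
      have := ih j v old h
      omega

lemma sum_set : ∀ (l : List Nat) (i : Nat) (v old : Nat), l[i]? = some old →
    (l.set i v).sum + old = l.sum + v := by
  intro l
  induction l with
  | nil => intro i v old h; simp at h
  | cons a t ih =>
    intro i v old h
    cases i with
    | zero =>
      simp only [List.getElem?_cons_zero, Option.some.injEq] at h
      subst h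
      show (v :: t).sum + _ = _
      simp only [List.sum_cons]
      omega
    | succ j =>
      simp only [List.getElem?_cons_succ] at h
      have hset : (a :: t).set (j + 1) v = a :: t.set j v := by simp
      rw [hset]
      simp only [List.sum_cons]
      have := ih j v old h
      omega

lemma infC_set2 {M N : Nat} {l : List (List (Option Int))} (hg : Good M N l)
    {r c : Nat} (hr : r < M) (hc : c < N) (hnone : cA l r c = none) (v : Int) :
    infC (set2 l r c (some v)) + 1 = infC l := by
  have hrl : r < l.length := hg.1 ▸ hr
  have hcl : c < (l[r]'hrl).length := (hg.2 r hrl) ▸ hc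
  have hcell : (l[r]'hrl)[c]'hcl = none := by
    rw [cA, good_get2 hg _ hr hc] at hnone; exact hnone
  simp only [infC, set2, List.getD_eq_getElem l [] hrl, List.map_set]
  have h1 := sum_set (l.map (fun row => row.countP (fun x => x.isNone))) r
    (((l[r]'hrl).set c (some v)).countP (fun x => x.isNone))
    ((l[r]'hrl).countP (fun x => x.isNone))
    (by rw [List.getElem?_map, List.getElem?_eq_getElem hrl]; rfl)
  have h2 := countP_set (fun x : Option Int => x.isNone) (l[r]'hrl) c (some v)
    ((l[r]'hrl)[c]'hcl) (List.getElem?_eq_getElem hcl)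
  rw [hcell] at h2
  simp at h2
  omega

def SIMstmt (grid : List (List String)) (M N : Nat) (fa : Nat) : Prop :=
  ∀ (ra : List (List (Option Int))) (rb : List (List Int)) (sn : List (List Bool))
    (f : List (Nat × Nat)) (d : Int) (fuelB : Nat),
    StInv grid M N ra rb sn →
    (∀ p ∈ f, p.1 < M ∧ p.2 < N ∧ cA ra p.1 p.2 = some d) →
    (f ≠ [] → f.length + 2 * infC ra + 1 ≤ fa) →
    (f ≠ [] → infC ra + 1 ≤ fuelB) →
    toOut (pvALoop M N fa ra f) = pvBLoop grid M N fuelB rb sn f d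

lemma get2_mapRange {α : Type} (g : Nat → Nat → α) (d : α) {M N r c : Nat}
    (hr : r < M) (hc : c < N) :
    get2 ((List.range M).map (fun r => (List.range N).map (fun c => g r c))) d r c = g r c := by
  simp [get2, List.getD_eq_getElem?_getD, hr, hc]

lemma good_mapRange {α : Type} (g : Nat → Nat → α) (M N : Nat) :
    Good M N ((List.range M).map (fun r => (List.range N).map (fun c => g r c))) := by
  refine ⟨by simp, ?_⟩
  intro i hi
  simp

lemma stout (grid : List (List String)) (M N : Nat) (ra : List (List (Option Int)))
    (rb : List (List Int)) (sn : List (List Bool)) (h : StInv grid M N ra rb sn) :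
    toOut ra = rb := by
  obtain ⟨ha, hb, hs, hpt⟩ := h
  apply List.ext_getElem
  · simp [toOut, ha.1, hb.1]
  intro i h1 h2
  have hiM : i < M := by simpa [toOut, ha.1] using h1
  have hia : i < ra.length := ha.1 ▸ hiM
  have hib : i < rb.length := hb.1 ▸ hiM
  simp only [toOut, List.getElem_map]
  apply List.ext_getElem
  · simp [ha.2 i hia, hb.2 i hib]
  intro j hj1 hj2
  have hjN : j < N := by simpa [ha.2 i hia] using hj1
  have hja : j < (ra[i]'hia).length := (ha.2 i hia) ▸ hjN
  have hjb : j < (rb[i]'hib).length := (hb.2 i hib) ▸ hjN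
  simp only [List.getElem_map]
  have hca : cA ra i j = (ra[i]'hia)[j]'hja := good_get2 ⟨ha.1, ha.2⟩ _ hiM hjN
  have hcb : cB rb i j = (rb[i]'hib)[j]'hjb := good_get2 ⟨hb.1, hb.2⟩ _ hiM hjN
  have hclause := hpt i j hiM hjN
  cases hra : (ra[i]'hia)[j]'hja with
  | none =>
    have := hclause.1 (by rw [hca, hra])
    rw [← hcb, this.2.2]
    rfl
  | some v =>
    have hcl2 := hclause.2 v (by rw [hca, hra])
    cases hsn : cS sn i j with
    | true => rw [← hcb, hcl2.1 hsn]; rfl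
    | false =>
      obtain ⟨hv, hrbv, _⟩ := hcl2.2 hsn
      rw [← hcb, hrbv, hv]
      rfl

lemma st_init (grid : List (List String)) (M N : Nat) :
    StInv grid M N (pvInitA grid M N) (pvInitB grid M N) (pvSeen0 grid M N) := by
  refine ⟨good_mapRange _ M N, good_mapRange _ M N, good_mapRange _ M N, ?_⟩
  intro r c hr hc
  rw [pvInitA, pvInitB, pvSeen0, cA, cB, cS,
    get2_mapRange _ _ hr hc, get2_mapRange _ _ hr hc, get2_mapRange _ _ hr hc]
  by_cases hG : pvCell grid r c = "G"
  · simp [hG]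
  · by_cases hO : pvCell grid r c = "O"
    · simp [hO]
    · simp [hG, hO]

lemma front_init (grid : List (List String)) (M N : Nat) :
    ∀ p ∈ pvGuards grid M N, p.1 < M ∧ p.2 < N ∧ cA (pvInitA grid M N) p.1 p.2 = some 0 := by
  intro p hp
  simp only [pvGuards, List.mem_flatMap, List.mem_filterMap, List.mem_range] at hp
  obtain ⟨r, hr, c, hc, hpc⟩ := hp
  by_cases hG : pvCell grid r c = "G"
  · rw [if_pos hG] at hpc
    cases hpc
    refine ⟨hr, hc, ?_⟩
    rw [pvInitA, cA, get2_mapRange _ _ hr hc, if_pos hG]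
  · rw [if_neg hG] at hpc
    cases hpc

lemma two_count {α : Type} (p q : α → Bool) (hpq : ∀ x, p x = true → q x = false) :
    ∀ l : List α, l.countP p + l.countP q ≤ l.length := by
  intro l
  induction l with
  | nil => simp
  | cons a t ih =>
    simp only [List.countP_cons, List.length_cons]
    by_cases hp : p a = true
    · have hq := hpq a hp
      simp [hp, hq]
      omega
    · simp only [Bool.not_eq_true] at hp
      by_cases hq : q a = true
      · simp [hp, hq]
        omega
      · simp only [Bool.not_eq_true] at hq
        simp [hp, hq]
        omega

lemma count_init (grid : List (List String)) (M N : Nat) :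
    (pvGuards grid M N).length + infC (pvInitA grid M N) ≤ M * N := by
  rw [pvGuards, pvInitA, infC, List.map_map]
  have key : ∀ rs : List Nat,
      (rs.flatMap (fun r =>
        (List.range N).filterMap (fun c => if pvCell grid r c = "G" then some (r, c) else none))).length +
      (rs.map ((fun row => row.countP (fun x : Option Int => x.isNone)) ∘ (fun r =>
        (List.range N).map (fun c =>
          if pvCell grid r c = "G" then some (0 : Int)
          else if pvCell grid r c = "O" then none
          else some (-1))))).sum ≤ rs.length * N := by
    intro rs
    induction rs with
    | nil => simp
    | cons r rs ih =>
      simp only [List.flatMap_cons, List.length_append, List.map_cons, List.sum_cons,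
        List.length_cons, Function.comp_apply]
      have hrow : ((List.range N).filterMap
            (fun c => if pvCell grid r c = "G" then some (r, c) else none)).length +
          ((List.range N).map (fun c =>
            if pvCell grid r c = "G" then some (0 : Int)
            else if pvCell grid r c = "O" then none
            else some (-1))).countP (fun x : Option Int => x.isNone) ≤ N := by
        rw [List.length_filterMap_eq_countP, List.countP_map]
        have h2 := two_count
          (fun c => ((if pvCell grid r c = "G" then some (r, c) else none)).isSome)
          ((fun x : Option Int => x.isNone) ∘ (fun c =>
            if pvCell grid r c = "G" then some (0 : Int)
            else if pvCell grid r c = "O" then none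
            else some (-1)))
          (by
            intro c hc
            simp only [Function.comp_apply]
            by_cases hG : pvCell grid r c = "G"
            · simp [hG]
            · simp [hG] at hc)
          (List.range N)
        simpa using h2
      have : (rs.length + 1) * N = rs.length * N + N := by ring
      omega
  have := key (List.range M)
  simpa using this

lemma aloop_nil (M N fa : Nat) (ra : List (List (Option Int))) :
    pvALoop M N fa ra [] = ra := by
  cases fa <;> rfl

lemma bloop_nil (grid : List (List String)) (M N fb : Nat) (rb : List (List Int))
    (sn : List (List Bool)) (d : Int) : pvBLoop grid M N fb rb sn [] d = rb := by
  cases fb <;> rfl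

lemma pvBCell_eq (grid : List (List String)) (M N : Nat) (dist : Int)
    (st : List (List Int) × List (List Bool) × List (Nat × Nat)) (rc : Nat × Nat) :
    pvBCell grid M N dist st rc =
      (pvDirs.map (fun dd => ((rc.1 : Int) + dd.1, (rc.2 : Int) + dd.2))).foldl
        (pvBStep grid M N dist) st := by
  have : pvNbrs rc = pvDirs.map (fun dd => ((rc.1 : Int) + dd.1, (rc.2 : Int) + dd.2)) := by
    simp [pvNbrs, pvDirs]
    omega
  rw [pvBCell, this]

-- one-cell expansion: A's four-direction fold and the level fold's four-neighbour fold stay coupled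
lemma dstep (grid : List (List String)) (M N : Nat) (r c : Nat) (d : Int) :
    ∀ (ds : List (Int × Int)) (ra : List (List (Option Int))) (rb : List (List Int))
      (sn : List (List Bool)) (wA accB : List (Nat × Nat)),
      StInv grid M N ra rb sn →
      cA ra r c = some d →
      (∀ q ∈ wA, q.1 < M ∧ q.2 < N ∧ cA ra q.1 q.2 = some (d + 1)) →
      StInv grid M N (ds.foldl (fun s dd => pvAStep M N s (r, c) dd) (ra, wA)).1
        ((ds.map (fun dd => ((r : Int) + dd.1, (c : Int) + dd.2))).foldl
          (pvBStep grid M N (d + 1)) (rb, sn, accB ++ wA)).1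
        ((ds.map (fun dd => ((r : Int) + dd.1, (c : Int) + dd.2))).foldl
          (pvBStep grid M N (d + 1)) (rb, sn, accB ++ wA)).2.1 ∧
      ((ds.map (fun dd => ((r : Int) + dd.1, (c : Int) + dd.2))).foldl
          (pvBStep grid M N (d + 1)) (rb, sn, accB ++ wA)).2.2 =
        accB ++ (ds.foldl (fun s dd => pvAStep M N s (r, c) dd) (ra, wA)).2 ∧
      (∀ (q : Nat × Nat) (v : Int), cA ra q.1 q.2 = some v →
        cA (ds.foldl (fun s dd => pvAStep M N s (r, c) dd) (ra, wA)).1 q.1 q.2 = some v) ∧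
      (∀ q ∈ (ds.foldl (fun s dd => pvAStep M N s (r, c) dd) (ra, wA)).2,
        q.1 < M ∧ q.2 < N ∧
        cA (ds.foldl (fun s dd => pvAStep M N s (r, c) dd) (ra, wA)).1 q.1 q.2 = some (d + 1)) ∧
      infC (ds.foldl (fun s dd => pvAStep M N s (r, c) dd) (ra, wA)).1 +
        (ds.foldl (fun s dd => pvAStep M N s (r, c) dd) (ra, wA)).2.length =
        infC ra + wA.length := by
  intro ds
  induction ds with
  | nil =>
    intro ra rb sn wA accB hst hp hw
    exact ⟨hst, rfl, fun q v h => h, hw, rfl⟩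
  | cons dd ds ih =>
    intro ra rb sn wA accB hst hp hw
    simp only [List.foldl_cons, List.map_cons]
    by_cases hb : 0 ≤ (r : Int) + dd.1 ∧ (r : Int) + dd.1 < (M : Int) ∧
        0 ≤ (c : Int) + dd.2 ∧ (c : Int) + dd.2 < (N : Int)
    · by_cases hnone : cA ra ((r : Int) + dd.1).toNat ((c : Int) + dd.2).toNat = none
      · -- discovery step
        set nrt := ((r : Int) + dd.1).toNat with hnrt
        set nct := ((c : Int) + dd.2).toNat with hnct
        have hnr : nrt < M := by omega
        have hnc : nct < N := by omega
        have hopen := (hst.2.2.2 nrt nct hnr hnc).1 hnone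
        have hAguard : pvAStep M N (ra, wA) (r, c) dd =
            (set2 ra nrt nct (some (d + 1)), wA ++ [(nrt, nct)]) := by
          rw [pvAStep]
          simp only []
          rw [if_pos ⟨hb.1, hb.2.1, hb.2.2.1, hb.2.2.2, hnone⟩]
          rw [hp]
          rfl
        have hBguard : pvBStep grid M N (d + 1) (rb, sn, accB ++ wA)
            ((r : Int) + dd.1, (c : Int) + dd.2) =
            (set2 rb nrt nct (d + 1), set2 sn nrt nct true, (accB ++ wA) ++ [(nrt, nct)]) := by
          rw [pvBStep]
          simp only []
          rw [if_pos ⟨hb.1, hb.2.1, hb.2.2.1, hb.2.2.2, hopen.2.1, hopen.1⟩]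
        rw [hAguard, hBguard]
        have hga := hst.1
        have hgb := hst.2.1
        have hgs := hst.2.2.1
        have hmono1 : ∀ (q : Nat × Nat) (v : Int), cA ra q.1 q.2 = some v →
            cA (set2 ra nrt nct (some (d + 1))) q.1 q.2 = some v := by
          intro q v hq
          by_cases hqe : nrt = q.1 ∧ nct = q.2
          · rw [hqe.1, hqe.2] at hnone
            rw [hnone] at hq
            cases hq
          · rw [cA, get2_set2_ne _ _ _ _ _ _ _ (by tauto), ← cA]
            exact hq
        have hst' : StInv grid M N (set2 ra nrt nct (some (d + 1)))
            (set2 rb nrt nct (d + 1)) (set2 sn nrt nct true) := by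
          refine ⟨good_set2 hga _ _ _, good_set2 hgb _ _ _, good_set2 hgs _ _ _, ?_⟩
          intro r' c' hr' hc'
          by_cases hqe : nrt = r' ∧ nct = c'
          · obtain ⟨he1, he2⟩ := hqe
            subst he1; subst he2
            rw [cA, get2_set2_self hga hnr hnc, cB, get2_set2_self hgb hnr hnc,
              cS, get2_set2_self hgs hnr hnc]
            constructor
            · intro hcon; cases hcon
            · intro v hv
              cases hv
              exact ⟨fun _ => rfl, fun hcon => by cases hcon⟩
          · rw [cA, get2_set2_ne _ _ _ _ _ _ _ (by tauto),
              cB, get2_set2_ne _ _ _ _ _ _ _ (by tauto),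
              cS, get2_set2_ne _ _ _ _ _ _ _ (by tauto)]
            exact hst.2.2.2 r' c' hr' hc'
        have hp' : cA (set2 ra nrt nct (some (d + 1))) r c = some d := hmono1 (r, c) d hp
        have hw' : ∀ q ∈ wA ++ [(nrt, nct)], q.1 < M ∧ q.2 < N ∧
            cA (set2 ra nrt nct (some (d + 1))) q.1 q.2 = some (d + 1) := by
          intro q hq
          rcases List.mem_append.mp hq with hq | hq
          · obtain ⟨h1, h2, h3⟩ := hw q hq
            exact ⟨h1, h2, hmono1 q _ h3⟩
          · simp only [List.mem_singleton] at hq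
            subst hq
            exact ⟨hnr, hnc, by rw [cA, get2_set2_self hga hnr hnc]⟩
        have hinf : infC (set2 ra nrt nct (some (d + 1))) + 1 = infC ra :=
          infC_set2 hga hnr hnc hnone (d + 1)
        have happ : (accB ++ wA) ++ [(nrt, nct)] = accB ++ (wA ++ [(nrt, nct)]) :=
          List.append_assoc _ _ _
        rw [happ]
        obtain ⟨c1, c2, c3, c4, c5⟩ := ih (set2 ra nrt nct (some (d + 1)))
          (set2 rb nrt nct (d + 1)) (set2 sn nrt nct true)
          (wA ++ [(nrt, nct)]) accB hst' hp' hw'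
        refine ⟨c1, c2, fun q v hv => c3 q v (hmono1 q v hv), c4, ?_⟩
        rw [c5]
        simp only [List.length_append, List.length_singleton]
        omega
      · -- in bounds but not inf: neither side moves
        have hAguard : pvAStep M N (ra, wA) (r, c) dd = (ra, wA) := by
          rw [pvAStep]
          simp only []
          rw [if_neg (by tauto)]
        have hnr : ((r : Int) + dd.1).toNat < M := by omega
        have hnc : ((c : Int) + dd.2).toNat < N := by omega
        obtain ⟨v, hv⟩ : ∃ v, cA ra ((r : Int) + dd.1).toNat ((c : Int) + dd.2).toNat = some v :=
          Option.ne_none_iff_exists'.mp hnone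
        have hcl := (hst.2.2.2 _ _ hnr hnc).2 v hv
        have hBguard : pvBStep grid M N (d + 1) (rb, sn, accB ++ wA)
            ((r : Int) + dd.1, (c : Int) + dd.2) = (rb, sn, accB ++ wA) := by
          rw [pvBStep]
          simp only []
          rw [if_neg ?_]
          intro hcon
          obtain ⟨_, _, _, _, hseen, hO⟩ := hcon
          cases hs : cS sn ((r : Int) + dd.1).toNat ((c : Int) + dd.2).toNat with
          | true => rw [cS] at hs; rw [hs] at hseen; cases hseen
          | false => exact (hcl.2 hs).2.2 hO
        rw [hAguard, hBguard]
        exact ih ra rb sn wA accB hst hp hw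
    · -- out of bounds: neither side moves
      have hAguard : pvAStep M N (ra, wA) (r, c) dd = (ra, wA) := by
        rw [pvAStep]
        simp only []
        rw [if_neg (by tauto)]
      have hBguard : pvBStep grid M N (d + 1) (rb, sn, accB ++ wA)
          ((r : Int) + dd.1, (c : Int) + dd.2) = (rb, sn, accB ++ wA) := by
        rw [pvBStep]
        simp only []
        rw [if_neg (by tauto)]
      rw [hAguard, hBguard]
      exact ih ra rb sn wA accB hst hp hw

-- processing the rest of a level: A's queue vs the level fold-then-next-level
lemma inner (grid : List (List String)) (M N faTop fuelBnext : Nat)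
    (IH : ∀ fa, fa < faTop → SIMstmt grid M N fa) :
    ∀ (f : List (Nat × Nat)) (fuelA : Nat) (acc : List (Nat × Nat))
      (ra : List (List (Option Int))) (rb : List (List Int)) (sn : List (List Bool)) (d : Int),
      StInv grid M N ra rb sn →
      (∀ p ∈ f, p.1 < M ∧ p.2 < N ∧ cA ra p.1 p.2 = some d) →
      (∀ q ∈ acc, q.1 < M ∧ q.2 < N ∧ cA ra q.1 q.2 = some (d + 1)) →
      (f ++ acc).length + 2 * infC ra + 1 ≤ fuelA →
      infC ra + (if acc = [] then 0 else 1) ≤ fuelBnext →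
      fuelA + (if f = [] then 1 else 0) ≤ faTop →
      toOut (pvALoop M N fuelA ra (f ++ acc)) =
        pvBLoop grid M N fuelBnext
          (f.foldl (pvBCell grid M N (d + 1)) (rb, sn, acc)).1
          (f.foldl (pvBCell grid M N (d + 1)) (rb, sn, acc)).2.1
          (f.foldl (pvBCell grid M N (d + 1)) (rb, sn, acc)).2.2 (d + 1) := by
  intro f
  induction f with
  | nil =>
    intro fuelA acc ra rb sn d hst hfr hacc hfa hfb htop
    simp only [List.nil_append, List.foldl_nil]
    cases hacc0 : acc with
    | nil =>
      subst hacc0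
      rw [aloop_nil, bloop_nil]
      exact stout grid M N ra rb sn hst
    | cons p acc' =>
      rw [← hacc0]
      have hne : acc ≠ [] := by rw [hacc0]; simp
      have hlt : fuelA < faTop := by
        simp at htop
        omega
      have hfb' : infC ra + 1 ≤ fuelBnext := by
        rw [if_neg hne] at hfb
        omega
      exact IH fuelA hlt ra rb sn acc (d + 1) fuelBnext hst hacc
        (fun _ => by simp at hfa; omega) (fun _ => hfb')
  | cons p f' ihf =>
    intro fuelA acc ra rb sn d hst hfr hacc hfa hfb htop
    obtain ⟨pr, pc⟩ := p
    have hp := hfr (pr, pc) (List.mem_cons_self)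
    obtain ⟨fa', rfl⟩ : ∃ k, fuelA = k + 1 := by
      cases fuelA with
      | zero => simp at hfa
      | succ k => exact ⟨k, rfl⟩
    simp only [List.cons_append]
    show toOut (pvALoop M N fa'
      ((pvDirs.foldl (fun s dd => pvAStep M N s (pr, pc) dd) (ra, [])).1)
      ((f' ++ acc) ++ (pvDirs.foldl (fun s dd => pvAStep M N s (pr, pc) dd) (ra, [])).2)) = _
    obtain ⟨c1, c2, c3, c4, c5⟩ := dstep grid M N pr pc d pvDirs ra rb sn [] acc
      hst hp.2.2 (by intro q hq; cases hq)
    simp only [List.append_nil, List.length_nil, Nat.add_zero] at c1 c2 c3 c4 c5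
    set A := pvDirs.foldl (fun s dd => pvAStep M N s (pr, pc) dd) (ra, []) with hA
    set B := (pvDirs.map (fun dd => ((pr : Int) + dd.1, (pc : Int) + dd.2))).foldl
      (pvBStep grid M N (d + 1)) (rb, sn, acc) with hB
    have hBc : pvBCell grid M N (d + 1) (rb, sn, acc) (pr, pc) = B := by
      rw [pvBCell_eq]
    have hstep : List.foldl (pvBCell grid M N (d + 1)) (rb, sn, acc) ((pr, pc) :: f') =
        List.foldl (pvBCell grid M N (d + 1)) (B.1, B.2.1, acc ++ A.2) f' := by
      rw [List.foldl_cons, hBc, ← c2]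
    rw [hstep]
    have hass : (f' ++ acc) ++ A.2 = f' ++ (acc ++ A.2) := List.append_assoc _ _ _
    rw [hass]
    apply ihf fa' (acc ++ A.2) A.1 B.1 B.2.1 d c1
    · intro q hq
      obtain ⟨h1, h2, h3⟩ := hfr q (List.mem_cons_of_mem _ hq)
      exact ⟨h1, h2, c3 q d h3⟩
    · intro q hq
      rcases List.mem_append.mp hq with hq | hq
      · obtain ⟨h1, h2, h3⟩ := hacc q hq
        exact ⟨h1, h2, c3 q (d + 1) h3⟩
      · exact c4 q hq
    · simp only [List.length_append, List.length_cons] at hfa ⊢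
      omega
    · by_cases hae : acc ++ A.2 = []
      · rw [if_pos hae]
        omega
      · rw [if_neg hae]
        by_cases ha0 : acc = []
        · have hA2 : A.2 ≠ [] := by
            intro hcon
            rw [ha0, hcon] at hae
            exact hae rfl
          have : 1 ≤ A.2.length := List.length_pos_iff.mpr hA2
          rw [if_pos ha0] at hfb
          omega
        · rw [if_neg ha0] at hfb
          omega
    · by_cases hf0 : f' = []
      · rw [if_pos hf0]
        simp only [if_neg (by simp : ((pr, pc) :: f') ≠ [])] at htop
        omega
      · rw [if_neg hf0]
        simp only [if_neg (by simp : ((pr, pc) :: f') ≠ [])] at htop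
        omega

lemma sim (grid : List (List String)) (M N : Nat) : ∀ fa, SIMstmt grid M N fa := by
  intro fa
  induction fa using Nat.strong_induction_on with
  | _ fa IH =>
    intro ra rb sn f d fuelB hst hfr hfa hfb
    cases f with
    | nil => rw [aloop_nil, bloop_nil]; exact stout grid M N ra rb sn hst
    | cons p f' =>
      have hfa' := hfa (by simp)
      have hfb' := hfb (by simp)
      obtain ⟨fb', rfl⟩ : ∃ k, fuelB = k + 1 := by
        cases fuelB with
        | zero => omega
        | succ k => exact ⟨k, rfl⟩
      show toOut (pvALoop M N fa ra (p :: f')) =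
        pvBLoop grid M N fb'
          ((p :: f').foldl (pvBCell grid M N (d + 1)) (rb, sn, [])).1
          ((p :: f').foldl (pvBCell grid M N (d + 1)) (rb, sn, [])).2.1
          ((p :: f').foldl (pvBCell grid M N (d + 1)) (rb, sn, [])).2.2 (d + 1)
      have := inner grid M N fa fb' (fun k hk => IH k hk) (p :: f') fa []
        ra rb sn d hst hfr (by intro q hq; cases hq)
        (by simpa using hfa') (by simpa using hfb')
        (by simp)
      simpa using this

-- ===== second bridge: the level BFS equals B's relaxation fixpoint =====

-- adjacency of two grid cells (symmetric by construction)
def Adj (r c r' c' : Nat) : Prop :=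
  (r = r' ∧ (c + 1 = c' ∨ c' + 1 = c)) ∨ (c = c' ∧ (r + 1 = r' ∨ r' + 1 = r))

lemma adj_symm {r c r' c' : Nat} (h : Adj r c r' c') : Adj r' c' r c := by
  unfold Adj at *; omega

def cntT (l : List (List Bool)) : Nat := (l.map (fun row => row.countP (fun x => x))).sum

-- the coupling invariant between the level-BFS state at level k and B's distance matrix d
def RInv (grid : List (List String)) (M N k : Nat) (rb : List (List Int))
    (sn : List (List Bool)) (f : List (Nat × Nat)) (d : List (List Int)) : Prop :=
  Good M N rb ∧ Good M N sn ∧ Good M N d ∧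
  (∀ p ∈ f, p.1 < M ∧ p.2 < N) ∧
  (∀ r c : Nat, r < M → c < N →
    (cS sn r c = true →
      cB rb r c = cB d r c ∧ 0 ≤ cB rb r c ∧ cB rb r c ≤ (k : Int) ∧ cB rb r c < pvINF M N) ∧
    (cS sn r c = false →
      cB rb r c = -1 ∧ cB d r c = (if pvCell grid r c = "O" then pvINF M N else -1)) ∧
    ((r, c) ∈ f ↔ (cS sn r c = true ∧ cB rb r c = (k : Int))) ∧
    (cS sn r c = false → pvCell grid r c = "O" →
      ∀ r' c' : Nat, r' < M → c' < N → Adj r c r' c' → cS sn r' c' = true →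
        cB rb r' c' = (k : Int))) ∧
  (f ≠ [] → k + 1 ≤ cntT sn)

-- midstate of one level's fold, relative to the level-start state (rb, sn) and frontier f
def Mid (grid : List (List String)) (M N k : Nat) (rb : List (List Int))
    (sn : List (List Bool)) (f : List (Nat × Nat))
    (rb1 : List (List Int)) (sn1 : List (List Bool)) (acc1 : List (Nat × Nat)) : Prop :=
  Good M N rb1 ∧ Good M N sn1 ∧
  (∀ p ∈ acc1, p.1 < M ∧ p.2 < N) ∧
  (∀ r c : Nat, r < M → c < N →
    (cS sn1 r c = true ↔ (cS sn r c = true ∨ (r, c) ∈ acc1)) ∧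
    ((r, c) ∈ acc1 → pvCell grid r c = "O" ∧ cS sn r c = false ∧
      cB rb1 r c = (k : Int) + 1 ∧ ∃ q ∈ f, Adj q.1 q.2 r c) ∧
    ((r, c) ∉ acc1 → cB rb1 r c = cB rb r c)) ∧
  cntT sn1 = cntT sn + acc1.length

lemma cntT_rows_le (N : Nat) : ∀ (l : List (List Bool)), (∀ row ∈ l, row.length ≤ N) →
    cntT l ≤ l.length * N := by
  intro l
  induction l with
  | nil => simp [cntT]
  | cons a t ih =>
    intro h
    have h1 : a.countP (fun x => x) ≤ N :=
      le_trans (List.countP_le_length) (h a List.mem_cons_self)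
    have h2 : cntT t ≤ t.length * N := ih (fun row hr => h row (List.mem_cons_of_mem _ hr))
    show a.countP (fun x => x) + cntT t ≤ (t.length + 1) * N
    have : (t.length + 1) * N = t.length * N + N := by ring
    omega

lemma cntT_le {M N : Nat} {sn : List (List Bool)} (hg : Good M N sn) : cntT sn ≤ M * N := by
  have h := cntT_rows_le N sn (by
    intro row hrow
    obtain ⟨i, hi, rfl⟩ := List.getElem_of_mem hrow
    exact le_of_eq (hg.2 i hi))
  rw [hg.1] at h
  exact h

lemma cntT_pos {M N : Nat} {sn : List (List Bool)} (hg : Good M N sn) {r c : Nat}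
    (hr : r < M) (hc : c < N) (h : cS sn r c = true) : 1 ≤ cntT sn := by
  have hrl : r < sn.length := hg.1 ▸ hr
  have hcl : c < (sn[r]'hrl).length := (hg.2 r hrl) ▸ hc
  have hcell : (sn[r]'hrl)[c]'hcl = true := by
    rw [cS, good_get2 hg _ hr hc] at h; exact h
  have hrow : 0 < (sn[r]'hrl).countP (fun x => x) := by
    rw [List.countP_pos_iff]
    exact ⟨_, List.getElem_mem hcl, hcell⟩
  have hmem : (sn[r]'hrl).countP (fun x => x) ∈
      sn.map (fun row => row.countP (fun x => x)) := by
    rw [List.mem_map]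
    exact ⟨_, List.getElem_mem hrl, rfl⟩
  have := List.single_le_sum (by intro x _; omega) _ hmem
  unfold cntT
  omega

lemma cntT_set2 {M N : Nat} {sn : List (List Bool)} (hg : Good M N sn) {r c : Nat}
    (hr : r < M) (hc : c < N) (hfalse : cS sn r c = false) :
    cntT (set2 sn r c true) = cntT sn + 1 := by
  have hrl : r < sn.length := hg.1 ▸ hr
  have hcl : c < (sn[r]'hrl).length := (hg.2 r hrl) ▸ hc
  have hcell : (sn[r]'hrl)[c]'hcl = false := by
    rw [cS, good_get2 hg _ hr hc] at hfalse; exact hfalse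
  simp only [cntT, set2, List.getD_eq_getElem sn [] hrl, List.map_set]
  have h1 := sum_set (sn.map (fun row => row.countP (fun x => x))) r
    (((sn[r]'hrl).set c true).countP (fun x => x))
    ((sn[r]'hrl).countP (fun x => x))
    (by rw [List.getElem?_map, List.getElem?_eq_getElem hrl]; rfl)
  have h2 := countP_set (fun x : Bool => x) (sn[r]'hrl) c true
    ((sn[r]'hrl)[c]'hcl) (List.getElem?_eq_getElem hcl)
  rw [hcell] at h2
  simp at h2
  omega

lemma nbrs_adj (rc : Nat × Nat) (nb : Int × Int) (h : nb ∈ pvNbrs rc)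
    (h1 : 0 ≤ nb.1) (h2 : 0 ≤ nb.2) : Adj rc.1 rc.2 nb.1.toNat nb.2.toNat := by
  obtain ⟨n1, n2⟩ := nb
  simp only [pvNbrs, List.mem_cons, List.not_mem_nil, or_false, Prod.mk.injEq] at h
  simp only at h1 h2
  unfold Adj
  omega

lemma adj_mem_nbrs (rc : Nat × Nat) (p : Nat × Nat) (h : Adj rc.1 rc.2 p.1 p.2) :
    ((p.1 : Int), (p.2 : Int)) ∈ pvNbrs rc := by
  obtain ⟨p1, p2⟩ := p
  simp only [pvNbrs, List.mem_cons, List.not_mem_nil, or_false, Prod.mk.injEq]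
  unfold Adj at h
  simp only at h
  omega

lemma nbrs4_adj (r c : Nat) (nb : Int × Int) (h : nb ∈ pvNbrs4 r c)
    (h1 : 0 ≤ nb.1) (h2 : 0 ≤ nb.2) : Adj r c nb.1.toNat nb.2.toNat := by
  obtain ⟨n1, n2⟩ := nb
  simp only [pvNbrs4, List.mem_cons, List.not_mem_nil, or_false, Prod.mk.injEq] at h
  simp only at h1 h2
  unfold Adj
  omega

lemma adj_mem_nbrs4 (r c : Nat) (p : Nat × Nat) (h : Adj r c p.1 p.2) :
    ((p.1 : Int), (p.2 : Int)) ∈ pvNbrs4 r c := by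
  obtain ⟨p1, p2⟩ := p
  simp only [pvNbrs4, List.mem_cons, List.not_mem_nil, or_false, Prod.mk.injEq]
  unfold Adj at h
  simp only at h
  omega

lemma midStep (grid : List (List String)) (M N k : Nat) (rb : List (List Int))
    (sn : List (List Bool)) (f : List (Nat × Nat))
    (st : List (List Int) × List (List Bool) × List (Nat × Nat)) (nb : Int × Int)
    (hm : Mid grid M N k rb sn f st.1 st.2.1 st.2.2)
    (hadj : 0 ≤ nb.1 → nb.1 < (M : Int) → 0 ≤ nb.2 → nb.2 < (N : Int) →
      ∃ q ∈ f, Adj q.1 q.2 nb.1.toNat nb.2.toNat) :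
    Mid grid M N k rb sn f (pvBStep grid M N ((k : Int) + 1) st nb).1
      (pvBStep grid M N ((k : Int) + 1) st nb).2.1 (pvBStep grid M N ((k : Int) + 1) st nb).2.2 ∧
    (∀ p, p ∈ st.2.2 → p ∈ (pvBStep grid M N ((k : Int) + 1) st nb).2.2) ∧
    (0 ≤ nb.1 → nb.1 < (M : Int) → 0 ≤ nb.2 → nb.2 < (N : Int) →
      pvCell grid nb.1.toNat nb.2.toNat = "O" → cS sn nb.1.toNat nb.2.toNat = false →
      (nb.1.toNat, nb.2.toNat) ∈ (pvBStep grid M N ((k : Int) + 1) st nb).2.2) := by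
  obtain ⟨hg1, hg2, hbd, hpt, hcn⟩ := hm
  by_cases hguard : 0 ≤ nb.1 ∧ nb.1 < (M : Int) ∧ 0 ≤ nb.2 ∧ nb.2 < (N : Int) ∧
      get2 st.2.1 false nb.1.toNat nb.2.toNat = false ∧ pvCell grid nb.1.toNat nb.2.toNat = "O"
  · have hstep : pvBStep grid M N ((k : Int) + 1) st nb =
        (set2 st.1 nb.1.toNat nb.2.toNat ((k : Int) + 1),
         set2 st.2.1 nb.1.toNat nb.2.toNat true, st.2.2 ++ [(nb.1.toNat, nb.2.toNat)]) := by
      rw [pvBStep]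
      rw [if_pos hguard]
    rw [hstep]
    set nrt := nb.1.toNat with hnrt
    set nct := nb.2.toNat with hnct
    have hnr : nrt < M := by omega
    have hnc : nct < N := by omega
    have hsn1 : cS st.2.1 nrt nct = false := hguard.2.2.2.2.1
    have hnin : (nrt, nct) ∉ st.2.2 := by
      intro hcon
      have := ((hpt nrt nct hnr hnc).1).mpr (Or.inr hcon)
      rw [hsn1] at this
      cases this
    have hsn0 : cS sn nrt nct = false := by
      cases hs : cS sn nrt nct with
      | false => rfl
      | true =>
        have := ((hpt nrt nct hnr hnc).1).mpr (Or.inl hs)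
        rw [hsn1] at this
        cases this
    refine ⟨⟨good_set2 hg1 _ _ _, good_set2 hg2 _ _ _, ?_, ?_, ?_⟩, ?_, ?_⟩
    · intro p hp
      rcases List.mem_append.mp hp with hp | hp
      · exact hbd p hp
      · simp only [List.mem_singleton] at hp
        subst hp
        exact ⟨hnr, hnc⟩
    · intro r c hr hc
      by_cases hqe : nrt = r ∧ nct = c
      · obtain ⟨rfl, rfl⟩ := hqe
        rw [cS, get2_set2_self hg2 hnr hnc, cB, get2_set2_self hg1 hnr hnc]
        refine ⟨by simp, ?_, ?_⟩
        · intro _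
          exact ⟨hguard.2.2.2.2.2, hsn0, rfl, hadj hguard.1 hguard.2.1 hguard.2.2.1 hguard.2.2.2.1⟩
        · intro hcon
          exact absurd (List.mem_append.mpr (Or.inr (List.mem_singleton.mpr rfl))) hcon
      · rw [cS, get2_set2_ne _ _ _ _ _ _ _ (by tauto), cB, get2_set2_ne _ _ _ _ _ _ _ (by tauto)]
        have hmem : ((r, c) ∈ st.2.2 ++ [(nrt, nct)]) ↔ (r, c) ∈ st.2.2 := by
          simp only [List.mem_append, List.mem_singleton]
          constructor
          · rintro (hx | hx)
            · exact hx
            · exfalso; apply hqe; exact ⟨congrArg Prod.fst hx.symm, congrArg Prod.snd hx.symm⟩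
          · exact Or.inl
        obtain ⟨q1, q2, q3⟩ := hpt r c hr hc
        rw [hmem]
        exact ⟨q1, q2, q3⟩
    · rw [cntT_set2 hg2 hnr hnc hsn1, hcn]
      simp only [List.length_append, List.length_cons, List.length_nil]
      omega
    · intro p hp
      exact List.mem_append.mpr (Or.inl hp)
    · intro _ _ _ _ _ _
      exact List.mem_append.mpr (Or.inr (List.mem_singleton.mpr rfl))
  · have hstep : pvBStep grid M N ((k : Int) + 1) st nb = st := by
      rw [pvBStep]
      rw [if_neg hguard]
    rw [hstep]
    refine ⟨⟨hg1, hg2, hbd, hpt, hcn⟩, fun p hp => hp, ?_⟩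
    intro hb1 hb2 hb3 hb4 hO hsn0
    have hseen : get2 st.2.1 false nb.1.toNat nb.2.toNat = true := by
      cases hs : get2 st.2.1 false nb.1.toNat nb.2.toNat with
      | true => rfl
      | false => exact absurd ⟨hb1, hb2, hb3, hb4, hs, hO⟩ hguard
    have hnr : nb.1.toNat < M := by omega
    have hnc : nb.2.toNat < N := by omega
    have := ((hpt nb.1.toNat nb.2.toNat hnr hnc).1).mp hseen
    rcases this with hs | hacc
    · rw [hsn0] at hs; cases hs
    · exact hacc

lemma midCell (grid : List (List String)) (M N k : Nat) (rb : List (List Int))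
    (sn : List (List Bool)) (f : List (Nat × Nat))
    (st : List (List Int) × List (List Bool) × List (Nat × Nat)) (rc : Nat × Nat)
    (hrc : rc ∈ f)
    (hm : Mid grid M N k rb sn f st.1 st.2.1 st.2.2) :
    Mid grid M N k rb sn f (pvBCell grid M N ((k : Int) + 1) st rc).1
      (pvBCell grid M N ((k : Int) + 1) st rc).2.1 (pvBCell grid M N ((k : Int) + 1) st rc).2.2 ∧
    (∀ p, p ∈ st.2.2 → p ∈ (pvBCell grid M N ((k : Int) + 1) st rc).2.2) ∧
    (∀ p : Nat × Nat, p.1 < M → p.2 < N → pvCell grid p.1 p.2 = "O" →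
      cS sn p.1 p.2 = false → Adj rc.1 rc.2 p.1 p.2 →
      p ∈ (pvBCell grid M N ((k : Int) + 1) st rc).2.2) := by
  obtain ⟨r0, c0⟩ := rc
  have hunf : pvBCell grid M N ((k : Int) + 1) st (r0, c0) =
      pvBStep grid M N ((k : Int) + 1) (pvBStep grid M N ((k : Int) + 1)
        (pvBStep grid M N ((k : Int) + 1) (pvBStep grid M N ((k : Int) + 1) st
          ((r0 : Int), (c0 : Int) + 1)) ((r0 : Int), (c0 : Int) - 1))
        ((r0 : Int) + 1, (c0 : Int))) ((r0 : Int) - 1, (c0 : Int)) := by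
    simp [pvBCell, pvNbrs]
  have hadj1 : ∀ nb : Int × Int, nb ∈ pvNbrs (r0, c0) →
      (0 ≤ nb.1 → nb.1 < (M : Int) → 0 ≤ nb.2 → nb.2 < (N : Int) →
        ∃ q ∈ f, Adj q.1 q.2 nb.1.toNat nb.2.toNat) := by
    intro nb hnb h1 _ h2 _
    exact ⟨(r0, c0), hrc, nbrs_adj (r0, c0) nb hnb h1 h2⟩
  have m1 := midStep grid M N k rb sn f st ((r0 : Int), (c0 : Int) + 1) hm
    (hadj1 _ (by simp [pvNbrs]))
  have m2 := midStep grid M N k rb sn f _ ((r0 : Int), (c0 : Int) - 1) m1.1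
    (hadj1 _ (by simp [pvNbrs]))
  have m3 := midStep grid M N k rb sn f _ ((r0 : Int) + 1, (c0 : Int)) m2.1
    (hadj1 _ (by simp [pvNbrs]))
  have m4 := midStep grid M N k rb sn f _ ((r0 : Int) - 1, (c0 : Int)) m3.1
    (hadj1 _ (by simp [pvNbrs]))
  rw [hunf]
  refine ⟨m4.1, ?_, ?_⟩
  · intro p hp
    exact m4.2.1 _ (m3.2.1 _ (m2.2.1 _ (m1.2.1 _ hp)))
  · intro p hp1 hp2 hO hsn hadj
    obtain ⟨p1, p2⟩ := p
    have hmem := adj_mem_nbrs (r0, c0) (p1, p2) hadj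
    have hb1 : (0 : Int) ≤ (p1 : Int) := Int.natCast_nonneg _
    have hb2 : ((p1 : Int)) < (M : Int) := by exact_mod_cast hp1
    have hb3 : (0 : Int) ≤ (p2 : Int) := Int.natCast_nonneg _
    have hb4 : ((p2 : Int)) < (N : Int) := by exact_mod_cast hp2
    simp only [pvNbrs, List.mem_cons, List.not_mem_nil, or_false, Prod.mk.injEq] at hmem
    simp only at hO hsn
    rcases hmem with ⟨e1, e2⟩ | ⟨e1, e2⟩ | ⟨e1, e2⟩ | ⟨e1, e2⟩
    · have er : ((r0 : Int), (c0 : Int) + 1).1.toNat = p1 := by simp only; omega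
      have ec : ((r0 : Int), (c0 : Int) + 1).2.toNat = p2 := by simp only; omega
      have key := m1.2.2 (by omega) (by omega) (by omega) (by omega)
      rw [er, ec] at key
      exact m4.2.1 _ (m3.2.1 _ (m2.2.1 _ (key hO hsn)))
    · have er : ((r0 : Int), (c0 : Int) - 1).1.toNat = p1 := by simp only; omega
      have ec : ((r0 : Int), (c0 : Int) - 1).2.toNat = p2 := by simp only; omega
      have key := m2.2.2 (by omega) (by omega) (by omega) (by omega)
      rw [er, ec] at key
      exact m4.2.1 _ (m3.2.1 _ (key hO hsn))
    · have er : ((r0 : Int) + 1, (c0 : Int)).1.toNat = p1 := by simp only; omega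
      have ec : ((r0 : Int) + 1, (c0 : Int)).2.toNat = p2 := by simp only; omega
      have key := m3.2.2 (by omega) (by omega) (by omega) (by omega)
      rw [er, ec] at key
      exact m4.2.1 _ (key hO hsn)
    · have er : ((r0 : Int) - 1, (c0 : Int)).1.toNat = p1 := by simp only; omega
      have ec : ((r0 : Int) - 1, (c0 : Int)).2.toNat = p2 := by simp only; omega
      have key := m4.2.2 (by omega) (by omega) (by omega) (by omega)
      rw [er, ec] at key
      exact key hO hsn

lemma midFold (grid : List (List String)) (M N k : Nat) (rb : List (List Int))
    (sn : List (List Bool)) (f : List (Nat × Nat)) :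
    ∀ (u : List (Nat × Nat)) (st : List (List Int) × List (List Bool) × List (Nat × Nat)),
      (∀ q ∈ u, q ∈ f) →
      Mid grid M N k rb sn f st.1 st.2.1 st.2.2 →
      Mid grid M N k rb sn f (u.foldl (pvBCell grid M N ((k : Int) + 1)) st).1
        (u.foldl (pvBCell grid M N ((k : Int) + 1)) st).2.1
        (u.foldl (pvBCell grid M N ((k : Int) + 1)) st).2.2 ∧
      (∀ p, p ∈ st.2.2 → p ∈ (u.foldl (pvBCell grid M N ((k : Int) + 1)) st).2.2) ∧
      (∀ p : Nat × Nat, p.1 < M → p.2 < N → pvCell grid p.1 p.2 = "O" →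
        cS sn p.1 p.2 = false → (∃ q ∈ u, Adj q.1 q.2 p.1 p.2) →
        p ∈ (u.foldl (pvBCell grid M N ((k : Int) + 1)) st).2.2) := by
  intro u
  induction u with
  | nil =>
    intro st _ hm
    refine ⟨hm, fun p hp => hp, ?_⟩
    rintro p _ _ _ _ ⟨q, hq, _⟩
    cases hq
  | cons q u' ih =>
    intro st hsub hm
    have hc := midCell grid M N k rb sn f st q (hsub q List.mem_cons_self) hm
    simp only [List.foldl_cons]
    obtain ⟨r1, r2, r3⟩ := ih (pvBCell grid M N ((k : Int) + 1) st q)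
      (fun x hx => hsub x (List.mem_cons_of_mem _ hx)) hc.1
    refine ⟨r1, fun p hp => r2 p (hc.2.1 p hp), ?_⟩
    rintro p hp1 hp2 hO hsn ⟨x, hx, hadj⟩
    rcases List.mem_cons.mp hx with rfl | hx'
    · exact r2 p (hc.2.2 p hp1 hp2 hO hsn hadj)
    · exact r3 p hp1 hp2 hO hsn ⟨x, hx', hadj⟩

lemma bestFold (M N kk : Nat) (cur : List (List Int)) (hk : (kk : Int) < pvINF M N) :
    ∀ (l : List (Int × Int)) (b : Int), (b = pvINF M N ∨ b = (kk : Int)) →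
      (∀ nb ∈ l, 0 ≤ nb.1 → nb.1 < (M : Int) → 0 ≤ nb.2 → nb.2 < (N : Int) →
        cB cur nb.1.toNat nb.2.toNat = (kk : Int) ∨ cB cur nb.1.toNat nb.2.toNat < 0 ∨
          pvINF M N ≤ cB cur nb.1.toNat nb.2.toNat) →
      ((b = (kk : Int) ∨ ∃ nb ∈ l, 0 ≤ nb.1 ∧ nb.1 < (M : Int) ∧ 0 ≤ nb.2 ∧ nb.2 < (N : Int) ∧
          cB cur nb.1.toNat nb.2.toNat = (kk : Int)) →
        l.foldl (fun best nb =>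
          if 0 ≤ nb.1 ∧ nb.1 < (M : Int) ∧ 0 ≤ nb.2 ∧ nb.2 < (N : Int) ∧
             0 ≤ cB cur nb.1.toNat nb.2.toNat ∧ cB cur nb.1.toNat nb.2.toNat < best
           then cB cur nb.1.toNat nb.2.toNat else best) b = (kk : Int)) ∧
      (¬ (b = (kk : Int) ∨ ∃ nb ∈ l, 0 ≤ nb.1 ∧ nb.1 < (M : Int) ∧ 0 ≤ nb.2 ∧ nb.2 < (N : Int) ∧
          cB cur nb.1.toNat nb.2.toNat = (kk : Int)) →
        l.foldl (fun best nb =>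
          if 0 ≤ nb.1 ∧ nb.1 < (M : Int) ∧ 0 ≤ nb.2 ∧ nb.2 < (N : Int) ∧
             0 ≤ cB cur nb.1.toNat nb.2.toNat ∧ cB cur nb.1.toNat nb.2.toNat < best
           then cB cur nb.1.toNat nb.2.toNat else best) b = b) := by
  intro l
  induction l with
  | nil =>
    intro b hb hval
    constructor
    · rintro (h | ⟨nb, hnb, _⟩)
      · simpa using h
      · cases hnb
    · intro _
      rfl
  | cons nb l' ih =>
    intro b hb hval
    simp only [List.foldl_cons]
    have hvaltail : ∀ x ∈ l', 0 ≤ x.1 → x.1 < (M : Int) → 0 ≤ x.2 → x.2 < (N : Int) →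
        cB cur x.1.toNat x.2.toNat = (kk : Int) ∨ cB cur x.1.toNat x.2.toNat < 0 ∨
          pvINF M N ≤ cB cur x.1.toNat x.2.toNat :=
      fun x hx => hval x (List.mem_cons_of_mem _ hx)
    by_cases hin : 0 ≤ nb.1 ∧ nb.1 < (M : Int) ∧ 0 ≤ nb.2 ∧ nb.2 < (N : Int)
    · rcases hval nb List.mem_cons_self hin.1 hin.2.1 hin.2.2.1 hin.2.2.2 with hvk | hneg | hbig
      · -- head neighbour carries exactly kk
        have hb' : (if 0 ≤ nb.1 ∧ nb.1 < (M : Int) ∧ 0 ≤ nb.2 ∧ nb.2 < (N : Int) ∧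
              0 ≤ cB cur nb.1.toNat nb.2.toNat ∧ cB cur nb.1.toNat nb.2.toNat < b
            then cB cur nb.1.toNat nb.2.toNat else b) = (kk : Int) := by
          rcases hb with rfl | rfl
          · rw [if_pos ⟨hin.1, hin.2.1, hin.2.2.1, hin.2.2.2, by omega, by omega⟩]
            exact hvk
          · rw [if_neg (by omega)]
        rw [hb']
        obtain ⟨i1, _⟩ := ih (kk : Int) (Or.inr rfl) hvaltail
        have hres := i1 (Or.inl rfl)
        constructor
        · intro _
          exact hres
        · intro hcon
          exfalso
          exact hcon (Or.inr ⟨nb, List.mem_cons_self,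
            hin.1, hin.2.1, hin.2.2.1, hin.2.2.2, hvk⟩)
      · -- negative (wall) value: guard fails
        have hb' : (if 0 ≤ nb.1 ∧ nb.1 < (M : Int) ∧ 0 ≤ nb.2 ∧ nb.2 < (N : Int) ∧
              0 ≤ cB cur nb.1.toNat nb.2.toNat ∧ cB cur nb.1.toNat nb.2.toNat < b
            then cB cur nb.1.toNat nb.2.toNat else b) = b := by
          rw [if_neg (by omega)]
        rw [hb']
        obtain ⟨i1, i2⟩ := ih b hb hvaltail
        constructor
        · rintro (h | ⟨x, hx, hq⟩)
          · exact i1 (Or.inl h)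
          · rcases List.mem_cons.mp hx with rfl | hx'
            · omega
            · exact i1 (Or.inr ⟨x, hx', hq⟩)
        · intro hcon
          exact i2 (by
            rintro (h | ⟨x, hx, hq⟩)
            · exact hcon (Or.inl h)
            · exact hcon (Or.inr ⟨x, List.mem_cons_of_mem _ hx, hq⟩))
      · -- value at least INF: guard fails whatever b is
        have hb' : (if 0 ≤ nb.1 ∧ nb.1 < (M : Int) ∧ 0 ≤ nb.2 ∧ nb.2 < (N : Int) ∧
              0 ≤ cB cur nb.1.toNat nb.2.toNat ∧ cB cur nb.1.toNat nb.2.toNat < b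
            then cB cur nb.1.toNat nb.2.toNat else b) = b := by
          rcases hb with rfl | rfl
          · rw [if_neg (by omega)]
          · rw [if_neg (by omega)]
        rw [hb']
        obtain ⟨i1, i2⟩ := ih b hb hvaltail
        constructor
        · rintro (h | ⟨x, hx, hq⟩)
          · exact i1 (Or.inl h)
          · rcases List.mem_cons.mp hx with rfl | hx'
            · omega
            · exact i1 (Or.inr ⟨x, hx', hq⟩)
        · intro hcon
          exact i2 (by
            rintro (h | ⟨x, hx, hq⟩)
            · exact hcon (Or.inl h)
            · exact hcon (Or.inr ⟨x, List.mem_cons_of_mem _ hx, hq⟩))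
    · have hb' : (if 0 ≤ nb.1 ∧ nb.1 < (M : Int) ∧ 0 ≤ nb.2 ∧ nb.2 < (N : Int) ∧
            0 ≤ cB cur nb.1.toNat nb.2.toNat ∧ cB cur nb.1.toNat nb.2.toNat < b
          then cB cur nb.1.toNat nb.2.toNat else b) = b := by
        rw [if_neg (by tauto)]
      rw [hb']
      obtain ⟨i1, i2⟩ := ih b hb hvaltail
      constructor
      · rintro (h | ⟨x, hx, hq⟩)
        · exact i1 (Or.inl h)
        · rcases List.mem_cons.mp hx with rfl | hx'
          · exact absurd ⟨hq.1, hq.2.1, hq.2.2.1, hq.2.2.2.1⟩ hin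
          · exact i1 (Or.inr ⟨x, hx', hq⟩)
      · intro hcon
        exact i2 (by
          rintro (h | ⟨x, hx, hq⟩)
          · exact hcon (Or.inl h)
          · exact hcon (Or.inr ⟨x, List.mem_cons_of_mem _ hx, hq⟩))

lemma eq_rangeMap {M N : Nat} {l : List (List Int)} (hg : Good M N l) (g : Nat → Nat → Int)
    (h : ∀ r c : Nat, r < M → c < N → g r c = cB l r c) :
    (List.range M).map (fun r => (List.range N).map (fun c => g r c)) = l := by
  apply List.ext_getElem
  · simp [hg.1]
  intro i h1 h2
  have hiM : i < M := by simpa using h1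
  have hil : i < l.length := hg.1 ▸ hiM
  apply List.ext_getElem
  · simp [hg.2 i hil]
  intro j hj1 hj2
  have hjN : j < N := by simpa using hj1
  have hjl : j < (l[i]'hil).length := (hg.2 i hil) ▸ hjN
  have := h i j hiM hjN
  rw [cB, good_get2 hg _ hiM hjN] at this
  simpa using this

-- pointwise value of one relaxation round, in terms of the new frontier
lemma relaxPt (grid : List (List String)) (M N k : Nat) (rb : List (List Int))
    (sn : List (List Bool)) (f : List (Nat × Nat)) (d : List (List Int))
    (f' : List (Nat × Nat))
    (hinv : RInv grid M N k rb sn f d)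
    (hsnd : ∀ p : Nat × Nat, p ∈ f' → p.1 < M ∧ p.2 < N ∧ pvCell grid p.1 p.2 = "O" ∧
      cS sn p.1 p.2 = false ∧ ∃ q ∈ f, Adj q.1 q.2 p.1 p.2)
    (hcomp : ∀ p : Nat × Nat, p.1 < M → p.2 < N → pvCell grid p.1 p.2 = "O" →
      cS sn p.1 p.2 = false → (∃ q ∈ f, Adj q.1 q.2 p.1 p.2) → p ∈ f')
    (hk : k + 1 ≤ M * N) :
    ∀ r c : Nat, r < M → c < N →
      pvVal M N d r c = (if (r, c) ∈ f' then (k : Int) + 1 else cB d r c) := by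
  obtain ⟨hgb, hgs, hgd, hfb, hcl, hcnt⟩ := hinv
  intro r c hr hc
  have hkI : (k : Int) < pvINF M N := by
    unfold pvINF
    exact_mod_cast (by omega : k < M * N)
  have hcell := hcl r c hr hc
  by_cases hs : cS sn r c = true
  · obtain ⟨hd, h0, hk', hlt⟩ := hcell.1 hs
    have hne : cB d r c ≠ pvINF M N := by rw [← hd]; omega
    have hnotf : (r, c) ∉ f' := by
      intro hcon
      have := (hsnd _ hcon).2.2.2.1
      rw [hs] at this
      cases this
    unfold pvVal
    rw [if_pos hne, if_neg hnotf]
  · have hsf : cS sn r c = false := by simpa using hs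
    obtain ⟨hrb, hd⟩ := hcell.2.1 hsf
    by_cases hO : pvCell grid r c = "O"
    · rw [if_pos hO] at hd
      have hval : ∀ nb ∈ pvNbrs4 r c, 0 ≤ nb.1 → nb.1 < (M : Int) → 0 ≤ nb.2 →
          nb.2 < (N : Int) →
          cB d nb.1.toNat nb.2.toNat = (k : Int) ∨ cB d nb.1.toNat nb.2.toNat < 0 ∨
            pvINF M N ≤ cB d nb.1.toNat nb.2.toNat := by
        intro nb hnb h1 h2 h3 h4
        have hnr : nb.1.toNat < M := by omega
        have hnc : nb.2.toNat < N := by omega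
        have hadj := nbrs4_adj r c nb hnb h1 h3
        cases hq : cS sn nb.1.toNat nb.2.toNat with
        | true =>
          have hrbq := hcell.2.2.2 hsf hO nb.1.toNat nb.2.toNat hnr hnc hadj hq
          have hdq := ((hcl _ _ hnr hnc).1 hq).1
          left
          rw [← hdq, hrbq]
        | false =>
          obtain ⟨_, hdq⟩ := (hcl _ _ hnr hnc).2.1 hq
          by_cases hOq : pvCell grid nb.1.toNat nb.2.toNat = "O"
          · right; right; rw [hdq, if_pos hOq]
          · right; left; rw [hdq, if_neg hOq]; omega
      obtain ⟨b1, b2⟩ := bestFold M N k d hkI (pvNbrs4 r c) (pvINF M N) (Or.inl rfl) hval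
      by_cases hf : (r, c) ∈ f'
      · obtain ⟨q, hqf, hadjq⟩ := (hsnd _ hf).2.2.2.2
        obtain ⟨hq1, hq2⟩ := hfb q hqf
        have hqm := ((hcl q.1 q.2 hq1 hq2).2.2.1).mp hqf
        have hqd : cB d q.1 q.2 = (k : Int) := by
          rw [← ((hcl q.1 q.2 hq1 hq2).1 hqm.1).1, hqm.2]
        have hmem : ((q.1 : Int), (q.2 : Int)) ∈ pvNbrs4 r c :=
          adj_mem_nbrs4 r c (q.1, q.2) (adj_symm hadjq)
        have hbest : pvBest M N d r c = (k : Int) := by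
          rw [pvBest]
          refine b1 (Or.inr ⟨((q.1 : Int), (q.2 : Int)), hmem, ?_, ?_, ?_, ?_, ?_⟩)
          · exact Int.natCast_nonneg _
          · show (q.1 : Int) < (M : Int)
            exact_mod_cast hq1
          · exact Int.natCast_nonneg _
          · show (q.2 : Int) < (N : Int)
            exact_mod_cast hq2
          · simpa using hqd
        unfold pvVal
        rw [if_neg (fun hcon => hcon hd), hbest, if_pos hkI, if_pos hf]
      · have hnex : ¬ (pvINF M N = (k : Int) ∨ ∃ nb ∈ pvNbrs4 r c,
            0 ≤ nb.1 ∧ nb.1 < (M : Int) ∧ 0 ≤ nb.2 ∧ nb.2 < (N : Int) ∧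
              cB d nb.1.toNat nb.2.toNat = (k : Int)) := by
          rintro (h | ⟨nb, hnb, hb1, hb2, hb3, hb4, hveq⟩)
          · omega
          · have hnr : nb.1.toNat < M := by omega
            have hnc : nb.2.toNat < N := by omega
            cases hq : cS sn nb.1.toNat nb.2.toNat with
            | false =>
              obtain ⟨_, hdq⟩ := (hcl _ _ hnr hnc).2.1 hq
              rw [hdq] at hveq
              by_cases hOq : pvCell grid nb.1.toNat nb.2.toNat = "O"
              · rw [if_pos hOq] at hveq
                omega
              · rw [if_neg hOq] at hveq
                omega
            | true =>
              have hrbq : cB rb nb.1.toNat nb.2.toNat = (k : Int) := by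
                rw [((hcl _ _ hnr hnc).1 hq).1, hveq]
              have hqf : (nb.1.toNat, nb.2.toNat) ∈ f :=
                ((hcl _ _ hnr hnc).2.2.1).mpr ⟨hq, hrbq⟩
              have hadj := nbrs4_adj r c nb hnb hb1 hb3
              exact hf (hcomp (r, c) hr hc hO hsf ⟨_, hqf, adj_symm hadj⟩)
        have hbest : pvBest M N d r c = pvINF M N := by
          rw [pvBest]
          exact b2 hnex
        unfold pvVal
        rw [if_neg (fun hcon => hcon hd), hbest, if_neg (lt_irrefl _), if_neg hf, hd]
    · rw [if_neg hO] at hd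
      have hne : cB d r c ≠ pvINF M N := by
        rw [hd]
        unfold pvINF
        omega
      have hnf : (r, c) ∉ f' := fun hcon => hO (hsnd _ hcon).2.2.1
      unfold pvVal
      rw [if_pos hne, if_neg hnf]

-- with an empty frontier the matrix is a fixed point of the relaxation
lemma relaxStable (grid : List (List String)) (M N k : Nat) (rb : List (List Int))
    (sn : List (List Bool)) (d : List (List Int))
    (hinv : RInv grid M N k rb sn [] d) :
    pvRelax M N d = d := by
  obtain ⟨hgb, hgs, hgd, hfb, hcl, hcnt⟩ := hinv
  unfold pvRelax
  apply eq_rangeMap hgd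
  intro r c hr hc
  have hcell := hcl r c hr hc
  by_cases hs : cS sn r c = true
  · obtain ⟨hd, h0, hk', hlt⟩ := hcell.1 hs
    have hne : cB d r c ≠ pvINF M N := by rw [← hd]; omega
    unfold pvVal
    rw [if_pos hne]
  · have hsf : cS sn r c = false := by simpa using hs
    obtain ⟨hrb, hd⟩ := hcell.2.1 hsf
    by_cases hO : pvCell grid r c = "O"
    · rw [if_pos hO] at hd
      have h1 : (0 : Int) < pvINF M N := by
        unfold pvINF
        have : 0 < M * N := Nat.mul_pos (by omega) (by omega)
        exact_mod_cast this
      have hnoseen : ∀ r' c' : Nat, r' < M → c' < N → Adj r c r' c' →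
          cS sn r' c' = false := by
        intro r' c' hr' hc' hadj
        cases hq : cS sn r' c' with
        | false => rfl
        | true =>
          have hrbq := hcell.2.2.2 hsf hO r' c' hr' hc' hadj hq
          have := ((hcl r' c' hr' hc').2.2.1).mpr ⟨hq, hrbq⟩
          cases this
      have hval : ∀ nb ∈ pvNbrs4 r c, 0 ≤ nb.1 → nb.1 < (M : Int) → 0 ≤ nb.2 →
          nb.2 < (N : Int) →
          cB d nb.1.toNat nb.2.toNat = ((0 : Nat) : Int) ∨ cB d nb.1.toNat nb.2.toNat < 0 ∨
            pvINF M N ≤ cB d nb.1.toNat nb.2.toNat := by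
        intro nb hnb hb1 hb2 hb3 hb4
        have hnr : nb.1.toNat < M := by omega
        have hnc : nb.2.toNat < N := by omega
        have hq := hnoseen nb.1.toNat nb.2.toNat hnr hnc (nbrs4_adj r c nb hnb hb1 hb3)
        obtain ⟨_, hdq⟩ := (hcl _ _ hnr hnc).2.1 hq
        by_cases hOq : pvCell grid nb.1.toNat nb.2.toNat = "O"
        · right; right; rw [hdq, if_pos hOq]
        · right; left; rw [hdq, if_neg hOq]; omega
      obtain ⟨_, b2⟩ := bestFold M N 0 d (by simpa using h1) (pvNbrs4 r c) (pvINF M N)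
        (Or.inl rfl) hval
      have hnex : ¬ (pvINF M N = ((0 : Nat) : Int) ∨ ∃ nb ∈ pvNbrs4 r c,
          0 ≤ nb.1 ∧ nb.1 < (M : Int) ∧ 0 ≤ nb.2 ∧ nb.2 < (N : Int) ∧
            cB d nb.1.toNat nb.2.toNat = ((0 : Nat) : Int)) := by
        rintro (h | ⟨nb, hnb, hb1, hb2, hb3, hb4, hveq⟩)
        · simp at h
          omega
        · rcases hval nb hnb hb1 hb2 hb3 hb4 with h' | h' | h'
          · have hnr : nb.1.toNat < M := by omega
            have hnc : nb.2.toNat < N := by omega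
            have hq := hnoseen nb.1.toNat nb.2.toNat hnr hnc (nbrs4_adj r c nb hnb hb1 hb3)
            obtain ⟨_, hdq⟩ := (hcl _ _ hnr hnc).2.1 hq
            rw [hdq] at hveq
            by_cases hOq : pvCell grid nb.1.toNat nb.2.toNat = "O"
            · rw [if_pos hOq] at hveq
              simp at hveq
              omega
            · rw [if_neg hOq] at hveq
              simp at hveq
          · rw [hveq] at h'
            simp at h'
          · rw [hveq] at h'
            simp at h'
            omega
      have hbest : pvBest M N d r c = pvINF M N := by
        rw [pvBest]
        exact b2 hnex
      unfold pvVal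
      rw [if_neg (fun hcon => hcon hd), hbest, if_neg (lt_irrefl _), hd]
    · rw [if_neg hO] at hd
      have hne : cB d r c ≠ pvINF M N := by
        rw [hd]
        unfold pvINF
        omega
      unfold pvVal
      rw [if_pos hne]

lemma good_ext {M N : Nat} {a b : List (List Int)} (ha : Good M N a) (hb : Good M N b)
    (h : ∀ r c : Nat, r < M → c < N → cB a r c = cB b r c) : a = b := by
  apply List.ext_getElem
  · rw [ha.1, hb.1]
  intro i h1 h2
  have hiM : i < M := ha.1 ▸ h1
  apply List.ext_getElem
  · rw [ha.2 i h1, hb.2 i h2]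
  intro j hj1 hj2
  have hjN : j < N := (ha.2 i h1) ▸ hj1
  have := h i j hiM hjN
  rw [cB, cB, good_get2 ha _ hiM hjN, good_get2 hb _ hiM hjN] at this
  exact this

lemma pvGuards_mem (grid : List (List String)) (M N r c : Nat) :
    (r, c) ∈ pvGuards grid M N ↔ r < M ∧ c < N ∧ pvCell grid r c = "G" := by
  simp only [pvGuards, List.mem_flatMap, List.mem_filterMap, List.mem_range]
  constructor
  · rintro ⟨a, ha, b, hb, hab⟩
    by_cases hG : pvCell grid a b = "G"
    · rw [if_pos hG] at hab
      cases hab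
      exact ⟨ha, hb, hG⟩
    · rw [if_neg hG] at hab
      cases hab
  · rintro ⟨hr, hc, hG⟩
    exact ⟨r, hr, c, hc, by rw [if_pos hG]⟩

lemma rloop_fix (M N fr : Nat) (d : List (List Int)) (h : pvRelax M N d = d) :
    pvRLoop M N fr d = d := by
  cases fr with
  | zero => rfl
  | succ n => simp [pvRLoop, h]

-- converting the sentinel to -1 recovers the BFS result matrix
lemma convRb (grid : List (List String)) (M N k : Nat) (rb : List (List Int))
    (sn : List (List Bool)) (f : List (Nat × Nat)) (d : List (List Int))
    (hinv : RInv grid M N k rb sn f d) :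
    d.map (fun row => row.map (fun x => if x = pvINF M N then -1 else x)) = rb := by
  obtain ⟨hgb, hgs, hgd, hfb, hcl, hcnt⟩ := hinv
  apply List.ext_getElem
  · simp [hgd.1, hgb.1]
  intro i h1 h2
  have hiM : i < M := by simpa [hgd.1] using h1
  have hid : i < d.length := hgd.1 ▸ hiM
  have hib : i < rb.length := hgb.1 ▸ hiM
  simp only [List.getElem_map]
  apply List.ext_getElem
  · simp [hgd.2 i hid, hgb.2 i hib]
  intro j hj1 hj2
  have hjN : j < N := by simpa [hgd.2 i hid] using hj1
  have hjd : j < (d[i]'hid).length := (hgd.2 i hid) ▸ hjN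
  have hjb : j < (rb[i]'hib).length := (hgb.2 i hib) ▸ hjN
  simp only [List.getElem_map]
  have hcd : cB d i j = (d[i]'hid)[j]'hjd := good_get2 hgd _ hiM hjN
  have hcb : cB rb i j = (rb[i]'hib)[j]'hjb := good_get2 hgb _ hiM hjN
  rw [← hcd, ← hcb]
  have hcell := hcl i j hiM hjN
  by_cases hs : cS sn i j = true
  · obtain ⟨hd, h0, hk', hlt⟩ := hcell.1 hs
    rw [← hd, if_neg (by omega)]
  · have hsf : cS sn i j = false := by simpa using hs
    obtain ⟨hrb, hd⟩ := hcell.2.1 hsf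
    by_cases hO : pvCell grid i j = "O"
    · rw [if_pos hO] at hd
      rw [hd, if_pos rfl, hrb]
    · rw [if_neg hO] at hd
      rw [hd, hrb, if_neg (by unfold pvINF; omega)]

-- one level of BFS expansion advances the invariant with one relaxation round
lemma stepRInv (grid : List (List String)) (M N k : Nat) (rb : List (List Int))
    (sn : List (List Bool)) (f : List (Nat × Nat)) (d : List (List Int))
    (hinv : RInv grid M N k rb sn f d) (hne : f ≠ []) :
    RInv grid M N (k + 1) (f.foldl (pvBCell grid M N ((k : Int) + 1)) (rb, sn, [])).1
      (f.foldl (pvBCell grid M N ((k : Int) + 1)) (rb, sn, [])).2.1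
      (f.foldl (pvBCell grid M N ((k : Int) + 1)) (rb, sn, [])).2.2
      (pvRelax M N d) ∧
    (∀ r c : Nat, r < M → c < N →
      cB (pvRelax M N d) r c =
        (if (r, c) ∈ (f.foldl (pvBCell grid M N ((k : Int) + 1)) (rb, sn, [])).2.2
         then (k : Int) + 1 else cB d r c)) := by
  have hgb := hinv.1
  have hgs := hinv.2.1
  have hgd := hinv.2.2.1
  have hfbnd := hinv.2.2.2.1
  have hcl := hinv.2.2.2.2.1
  have hcnt0 := hinv.2.2.2.2.2 hne
  have hMid0 : Mid grid M N k rb sn f rb sn [] := by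
    refine ⟨hgb, hgs, ?_, ?_, ?_⟩
    · intro p hp
      cases hp
    · intro r c hr hc
      refine ⟨by simp, ?_, fun _ => rfl⟩
      intro h
      cases h
    · simp
  obtain ⟨hmF, hmono, hcomp⟩ := midFold grid M N k rb sn f f (rb, sn, []) (fun q hq => hq) hMid0
  set F := f.foldl (pvBCell grid M N ((k : Int) + 1)) (rb, sn, ([] : List (Nat × Nat))) with hF
  obtain ⟨hgb', hgs', hbd', hpt', hcntM⟩ := hmF
  have hsnd : ∀ p : Nat × Nat, p ∈ F.2.2 → p.1 < M ∧ p.2 < N ∧ pvCell grid p.1 p.2 = "O" ∧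
      cS sn p.1 p.2 = false ∧ ∃ q ∈ f, Adj q.1 q.2 p.1 p.2 := by
    intro p hp
    obtain ⟨hb1, hb2⟩ := hbd' p hp
    have hm := (hpt' p.1 p.2 hb1 hb2).2.1 (by rw [Prod.mk.eta]; exact hp)
    exact ⟨hb1, hb2, hm.1, hm.2.1, hm.2.2.2⟩
  have hcomp' : ∀ p : Nat × Nat, p.1 < M → p.2 < N → pvCell grid p.1 p.2 = "O" →
      cS sn p.1 p.2 = false → (∃ q ∈ f, Adj q.1 q.2 p.1 p.2) → p ∈ F.2.2 :=
    fun p h1 h2 h3 h4 h5 => hcomp p h1 h2 h3 h4 h5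
  have hk2 : k + 1 ≤ M * N := le_trans hcnt0 (cntT_le hgs)
  have hpv := relaxPt grid M N k rb sn f d F.2.2 hinv hsnd hcomp' hk2
  have cd' : ∀ r c : Nat, r < M → c < N →
      cB (pvRelax M N d) r c = (if (r, c) ∈ F.2.2 then (k : Int) + 1 else cB d r c) := by
    intro r c hr hc
    rw [cB]
    unfold pvRelax
    rw [get2_mapRange _ _ hr hc]
    exact hpv r c hr hc
  have hgrelax : Good M N (pvRelax M N d) := by
    unfold pvRelax
    exact good_mapRange _ _ _
  have hcntle' : cntT F.2.1 ≤ M * N := cntT_le hgs'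
  refine ⟨⟨hgb', hgs', hgrelax, hbd', ?_, ?_⟩, cd'⟩
  · intro r c hr hc
    obtain ⟨hiff, hacc, hnacc⟩ := hpt' r c hr hc
    have hcell := hcl r c hr hc
    refine ⟨?_, ?_, ?_, ?_⟩
    · -- seen clause
      intro hs'
      rw [cd' r c hr hc]
      by_cases hmem : (r, c) ∈ F.2.2
      · obtain ⟨_, _, hrbv, _⟩ := hacc hmem
        have hlen : 1 ≤ F.2.2.length := List.length_pos_iff.mpr (by
          intro hcon; rw [hcon] at hmem; cases hmem)
        have hINF : k + 2 ≤ M * N := by omega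
        rw [if_pos hmem, hrbv]
        refine ⟨rfl, by omega, by push_cast; omega, ?_⟩
        unfold pvINF
        have : ((k : Int) + 1) < ((M * N : Nat) : Int) := by
          have : k + 1 < M * N := by omega
          exact_mod_cast this
        omega
      · have hsold : cS sn r c = true := by
          rcases hiff.mp hs' with h | h
          · exact h
          · exact absurd h hmem
        obtain ⟨hd, h0, hk', hlt⟩ := hcell.1 hsold
        rw [if_neg hmem, hnacc hmem]
        refine ⟨hd, h0, by push_cast; omega, hlt⟩
    · -- unseen clause
      intro hs'
      have hsold : cS sn r c = false := by
        cases hq : cS sn r c with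
        | false => rfl
        | true => rw [hiff.mpr (Or.inl hq)] at hs'; cases hs'
      have hmem : (r, c) ∉ F.2.2 := by
        intro hcon
        rw [hiff.mpr (Or.inr hcon)] at hs'
        cases hs'
      obtain ⟨hrb, hd⟩ := hcell.2.1 hsold
      rw [cd' r c hr hc, if_neg hmem, hnacc hmem]
      exact ⟨hrb, hd⟩
    · -- membership iff
      constructor
      · intro hmem
        obtain ⟨_, _, hrbv, _⟩ := hacc hmem
        exact ⟨hiff.mpr (Or.inr hmem), by rw [hrbv]; push_cast; ring⟩
      · rintro ⟨hs', he⟩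
        by_cases hmem : (r, c) ∈ F.2.2
        · exact hmem
        · exfalso
          have hsold : cS sn r c = true := by
            rcases hiff.mp hs' with h | h
            · exact h
            · exact absurd h hmem
          obtain ⟨_, _, hk', _⟩ := hcell.1 hsold
          rw [hnacc hmem] at he
          rw [he] at hk'
          push_cast at hk'
          omega
    · -- no-shortcut at level k+1
      intro hs' hO r' c' hr' hc' hadj hq'
      have hsold : cS sn r c = false := by
        cases hq : cS sn r c with
        | false => rfl
        | true => rw [hiff.mpr (Or.inl hq)] at hs'; cases hs'
      have hmem : (r, c) ∉ F.2.2 := by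
        intro hcon
        rw [hiff.mpr (Or.inr hcon)] at hs'
        cases hs'
      obtain ⟨hiff2, hacc2, hnacc2⟩ := hpt' r' c' hr' hc'
      rcases hiff2.mp hq' with hsold' | hf'
      · exfalso
        have hrbq := hcell.2.2.2 hsold hO r' c' hr' hc' hadj hsold'
        have hqf : (r', c') ∈ f := ((hcl r' c' hr' hc').2.2.1).mpr ⟨hsold', hrbq⟩
        exact hmem (hcomp' (r, c) hr hc hO hsold ⟨(r', c'), hqf, adj_symm hadj⟩)
      · obtain ⟨_, _, hrbv, _⟩ := hacc2 hf'
        rw [hrbv]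
        push_cast
        ring
  · intro hne'
    have hlen : 1 ≤ F.2.2.length := List.length_pos_iff.mpr hne'
    omega

lemma simR (grid : List (List String)) (M N : Nat) :
    ∀ (fr fa k : Nat) (rb : List (List Int)) (sn : List (List Bool))
      (f : List (Nat × Nat)) (d : List (List Int)),
      RInv grid M N k rb sn f d →
      (f ≠ [] → M * N + 1 ≤ k + fa) → (f ≠ [] → M * N ≤ k + fr) →
      pvBLoop grid M N fa rb sn f (k : Int) =
        (pvRLoop M N fr d).map (fun row => row.map (fun x => if x = pvINF M N then -1 else x)) := by
  intro fr
  induction fr using Nat.strong_induction_on with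
  | _ fr IH =>
    intro fa k rb sn f d hinv hfa hfr
    cases f with
    | nil =>
      rw [bloop_nil]
      rw [rloop_fix M N _ d (relaxStable grid M N k rb sn d hinv)]
      exact (convRb grid M N k rb sn [] d hinv).symm
    | cons p f0 =>
      have hne : (p :: f0) ≠ [] := by simp
      have hcnt := hinv.2.2.2.2.2 hne
      have hkM : k + 1 ≤ M * N := le_trans hcnt (cntT_le hinv.2.1)
      obtain ⟨fa', rfl⟩ : ∃ x, fa = x + 1 := ⟨fa - 1, by have := hfa hne; omega⟩
      obtain ⟨fr', rfl⟩ : ∃ x, fr = x + 1 := ⟨fr - 1, by have := hfr hne; omega⟩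
      obtain ⟨hinv', cd'⟩ := stepRInv grid M N k rb sn (p :: f0) d hinv hne
      set F := (p :: f0).foldl (pvBCell grid M N ((k : Int) + 1))
        (rb, sn, ([] : List (Nat × Nat))) with hF
      have hstepL : pvBLoop grid M N (fa' + 1) rb sn (p :: f0) (k : Int) =
          pvBLoop grid M N fa' F.1 F.2.1 F.2.2 ((k : Int) + 1) := rfl
      rw [hstepL]
      have hgrelax : Good M N (pvRelax M N d) := by
        unfold pvRelax
        exact good_mapRange _ _ _
      by_cases hf' : F.2.2 = []
      · have hrel : pvRelax M N d = d := by
          apply good_ext hgrelax hinv.2.2.1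
          intro r c hr hc
          rw [cd' r c hr hc, hf']
          simp
        rw [rloop_fix M N _ d hrel]
        rw [hf', bloop_nil]
        rw [hf', hrel] at hinv'
        exact (convRb grid M N (k + 1) F.1 F.2.1 [] d hinv').symm
      · have hnd : pvRelax M N d ≠ d := by
          intro heq
          obtain ⟨q, hq⟩ := List.exists_mem_of_ne_nil _ hf'
          obtain ⟨hb1, hb2⟩ := hinv'.2.2.2.1 q hq
          have hv : cB d q.1 q.2 = (k : Int) + 1 := by
            have := cd' q.1 q.2 hb1 hb2
            rw [heq, if_pos (by rw [Prod.mk.eta]; exact hq)] at this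
            exact this
          have hkM2 : k + 2 ≤ M * N :=
            le_trans (hinv'.2.2.2.2.2 hf') (cntT_le hinv'.2.1)
          have hcell := hinv.2.2.2.2.1 q.1 q.2 hb1 hb2
          cases hs : cS sn q.1 q.2 with
          | true =>
            obtain ⟨hd, h0, hk', _⟩ := hcell.1 hs
            rw [← hd] at hv
            omega
          | false =>
            obtain ⟨_, hd⟩ := hcell.2.1 hs
            rw [hd] at hv
            by_cases hOq : pvCell grid q.1 q.2 = "O"
            · rw [if_pos hOq] at hv
              unfold pvINF at hv
              have : ((k : Int) + 1) < ((M * N : Nat) : Int) := by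
                have : k + 1 < M * N := by omega
                exact_mod_cast this
              omega
            · rw [if_neg hOq] at hv
              omega
        have hstepR : pvRLoop M N (fr' + 1) d = pvRLoop M N fr' (pvRelax M N d) := by
          simp only [pvRLoop]
          rw [if_neg hnd]
        rw [hstepR]
        have hcast : ((k + 1 : Nat) : Int) = (k : Int) + 1 := by push_cast; ring
        have ha1 := hfa hne
        have ha2 := hfr hne
        have := IH fr' (by omega) fa' (k + 1) F.1 F.2.1 F.2.2 (pvRelax M N d) hinv'
          (fun _ => by omega) (fun _ => by omega)
        rw [hcast] at this
        exact this

lemma rInvInit (grid : List (List String)) (M N : Nat) :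
    RInv grid M N 0 (pvInitB grid M N) (pvSeen0 grid M N) (pvGuards grid M N)
      (pvInitR grid M N) := by
  have eb : ∀ r c : Nat, r < M → c < N → cB (pvInitB grid M N) r c =
      (if pvCell grid r c = "G" then (0 : Int) else -1) := by
    intro r c hr hc
    rw [cB, pvInitB, get2_mapRange _ _ hr hc]
  have es : ∀ r c : Nat, r < M → c < N → cS (pvSeen0 grid M N) r c =
      decide (pvCell grid r c = "G") := by
    intro r c hr hc
    rw [cS, pvSeen0, get2_mapRange _ _ hr hc]
  have ed : ∀ r c : Nat, r < M → c < N → cB (pvInitR grid M N) r c =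
      (if pvCell grid r c = "G" then (0 : Int)
       else if pvCell grid r c = "O" then pvINF M N else -1) := by
    intro r c hr hc
    rw [cB, pvInitR, get2_mapRange _ _ hr hc]
  refine ⟨good_mapRange _ _ _, good_mapRange _ _ _, good_mapRange _ _ _, ?_, ?_, ?_⟩
  · intro p hp
    obtain ⟨h1, h2, _⟩ := (pvGuards_mem grid M N p.1 p.2).mp (by rw [Prod.mk.eta]; exact hp)
    exact ⟨h1, h2⟩
  · intro r c hr hc
    refine ⟨?_, ?_, ?_, ?_⟩
    · intro hs
      rw [es r c hr hc] at hs
      have hG := of_decide_eq_true hs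
      rw [eb r c hr hc, ed r c hr hc, if_pos hG, if_pos hG]
      refine ⟨rfl, le_refl _, by simp, ?_⟩
      unfold pvINF
      have : 0 < M * N := Nat.mul_pos (by omega) (by omega)
      exact_mod_cast this
    · intro hs
      rw [es r c hr hc] at hs
      have hG : pvCell grid r c ≠ "G" := by
        intro hcon
        rw [decide_eq_true hcon] at hs
        cases hs
      rw [eb r c hr hc, ed r c hr hc, if_neg hG, if_neg hG]
      exact ⟨rfl, rfl⟩
    · rw [pvGuards_mem grid M N r c, es r c hr hc, eb r c hr hc]
      constructor
      · rintro ⟨_, _, hG⟩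
        rw [if_pos hG]
        exact ⟨decide_eq_true hG, by simp⟩
      · rintro ⟨hs, _⟩
        exact ⟨hr, hc, of_decide_eq_true hs⟩
    · intro _ _ r' c' hr' hc' _ hs'
      rw [es r' c' hr' hc'] at hs'
      rw [eb r' c' hr' hc', if_pos (of_decide_eq_true hs')]
      simp
  · intro hne
    obtain ⟨p, hp⟩ := List.exists_mem_of_ne_nil _ hne
    obtain ⟨h1, h2, hG⟩ := (pvGuards_mem grid M N p.1 p.2).mp (by rw [Prod.mk.eta]; exact hp)
    have hseen : cS (pvSeen0 grid M N) p.1 p.2 = true := by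
      rw [cS, pvSeen0, get2_mapRange _ _ h1 h2]
      exact decide_eq_true hG
    exact cntT_pos (good_mapRange _ M N) h1 h2 hseen

-- ===== VERDICT (by name: the statement is the Claim_ definition above) =====
theorem find_distance_to_guards_spec : Claim_equal_find_distance_to_guards := by
  intro grid _ _
  unfold Spec_find_distance_to_guards find_distance_to_guards find_distance_to_guards_alt
  by_cases hg : grid = []
  · simp [hg]
  · simp only [if_neg hg]
    have hcount := count_init grid grid.length (grid.headD []).length
    have h1 : toOut (pvALoop grid.length (grid.headD []).length
        ((pvGuards grid grid.length (grid.headD []).length).length +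
          2 * (grid.length * (grid.headD []).length) + 1)
        (pvInitA grid grid.length (grid.headD []).length)
        (pvGuards grid grid.length (grid.headD []).length)) =
        pvBLoop grid grid.length (grid.headD []).length
          (grid.length * (grid.headD []).length + 1)
          (pvInitB grid grid.length (grid.headD []).length)
          (pvSeen0 grid grid.length (grid.headD []).length)
          (pvGuards grid grid.length (grid.headD []).length) 0 :=
      sim grid grid.length (grid.headD []).length
        ((pvGuards grid grid.length (grid.headD []).length).length +
          2 * (grid.length * (grid.headD []).length) + 1)
        (pvInitA grid grid.length (grid.headD []).length)
        (pvInitB grid grid.length (grid.headD []).length)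
        (pvSeen0 grid grid.length (grid.headD []).length)
        (pvGuards grid grid.length (grid.headD []).length) 0
        (grid.length * (grid.headD []).length + 1)
        (st_init grid _ _) (front_init grid _ _) (fun _ => by omega) (fun _ => by omega)
    have h2 : pvBLoop grid grid.length (grid.headD []).length
        (grid.length * (grid.headD []).length + 1)
        (pvInitB grid grid.length (grid.headD []).length)
        (pvSeen0 grid grid.length (grid.headD []).length)
        (pvGuards grid grid.length (grid.headD []).length) ((0 : Nat) : Int) =
        (pvRLoop grid.length (grid.headD []).length
          (grid.length * (grid.headD []).length)
          (pvInitR grid grid.length (grid.headD []).length)).map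
          (fun row => row.map (fun x =>
            if x = pvINF grid.length (grid.headD []).length then -1 else x)) :=
      simR grid grid.length (grid.headD []).length
        (grid.length * (grid.headD []).length)
        (grid.length * (grid.headD []).length + 1) 0
        (pvInitB grid grid.length (grid.headD []).length)
        (pvSeen0 grid grid.length (grid.headD []).length)
        (pvGuards grid grid.length (grid.headD []).length)
        (pvInitR grid grid.length (grid.headD []).length)
        (rInvInit grid _ _) (fun _ => by omega) (fun _ => by omega)
    rw [h1]
    rw [show ((0 : Nat) : Int) = (0 : Int) by norm_num] at h2
    rw [h2]
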